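-- pv_equiv track=rewrite | github.com/LPL2211/PA | mexico_wall/wall_of_mexico.py | find_min_wall_length
-- ===== SOURCE A (Python) =====
-- def is_valid_cell(matrix, i, j):
--     rows, cols = len(matrix), len(matrix[0])
--     return i < rows and i >= 0 and j < cols and j >= 0
--
-- def find_min_wall_length(matrix, i, j, threshold):
--     directions = [(0,1), (1,0), (-1, 0), (0, -1)]
--     cost = 0
--     res = threshold
--
--     queue = []
--
--     queue.append((i, j, cost))
--     visited = [[False] * len(matrix[0]) for _ in range(len(matrix))]
--     existing_costs = [[float('inf')] * len(matrix[0])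
--                        for _ in range(len(matrix))]
--
--     while queue:
--
--         i, j, csf = queue.pop(0)
--
--         # Pruning: if cost so far exceeds the min path found already
--         # no need to explore further
--         if csf > res:
--             continue
--
--         for direction in directions:
--             new_i = i + direction[0]
--             new_j = j + direction[1]
--             if is_valid_cell(matrix, new_i, new_j) and not visited[new_i][new_j]:
--                 cell_val = matrix[new_i][new_j]
--                 if cell_val == "A":
--                     # Atlantic is reached, yay!
--                     res = min(res, csf)
--                     continue
--                 elif cell_val == "." or cell_val == "M" or cell_val == "U" or cell_val == "P":
--                     # no path possible
--                     visited[new_i][new_j] = True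
--                     continue
--                 else:
--                     # it's a digit
--                     if existing_costs[new_i][new_j] > csf + int(cell_val):
--                         queue.append((new_i, new_j, csf + int(cell_val)))
--                         existing_costs[new_i][new_j] = csf + int(cell_val)
--     return res
-- ===== SOURCE B (Python) =====
-- def find_min_wall_length(matrix, i, j, threshold):
--     # Bellman-style relaxation over the whole grid instead of A's FIFO queue:
--     # seed the start's neighbours, sweep the grid until no distance improves,
--     # then take the best distance among cells bordering the Atlantic.
--     rows, cols = len(matrix), len(matrix[0])
--     dirs = ((0, 1), (1, 0), (-1, 0), (0, -1))
--     blocked = (".", "M", "U", "P")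
--     best = threshold
--     dist = {}
--     for dr, dc in dirs:
--         r, c = i + dr, j + dc
--         if 0 <= r < rows and 0 <= c < cols:
--             v = matrix[r][c]
--             if v == "A":
--                 best = min(best, 0)
--             elif v not in blocked:
--                 w = int(v)
--                 if (r, c) not in dist or w < dist[(r, c)]:
--                     dist[(r, c)] = w
--     changed = True
--     while changed:
--         changed = False
--         for r in range(rows):
--             for c in range(cols):
--                 if (r, c) in dist:
--                     d = dist[(r, c)]
--                     for dr, dc in dirs:
--                         nr, nc = r + dr, c + dc
--                         if 0 <= nr < rows and 0 <= nc < cols: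
--                             v = matrix[nr][nc]
--                             if v != "A" and v not in blocked:
--                                 w = int(v)
--                                 if (nr, nc) not in dist or d + w < dist[(nr, nc)]:
--                                     dist[(nr, nc)] = d + w
--                                     changed = True
--     for (r, c), d in dist.items():
--         for dr, dc in dirs:
--             nr, nc = r + dr, c + dc
--             if 0 <= nr < rows and 0 <= nc < cols and matrix[nr][nc] == "A":
--                 best = min(best, d)
--     return best
-- ===== Notes on version B (the rewrite author's own statement) =====
-- stated objective: alternative
-- what changed: A's FIFO worklist (SPFA-style list queue with pop(0), per-cell cost table and threshold pruning) is replaced by Bellman-style relaxation: seed the start's neighbours in a dict, sweep the whole grid until no distance improves, then take the best distance among cells bordering an 'A' cell.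
-- outside the precondition, e.g. on find_min_wall_length([['1', '9', 'x']], 0, 0, 0): A returns 0, B raises ValueError; on find_min_wall_length([['0', '20', '-15', 'A']], 0, 0, 10): A returns 10, B returns 5; on find_min_wall_length([['1', '9'], ['3']], 0, 0, 0): A returns 0, B raises IndexError
import Mathlib
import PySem

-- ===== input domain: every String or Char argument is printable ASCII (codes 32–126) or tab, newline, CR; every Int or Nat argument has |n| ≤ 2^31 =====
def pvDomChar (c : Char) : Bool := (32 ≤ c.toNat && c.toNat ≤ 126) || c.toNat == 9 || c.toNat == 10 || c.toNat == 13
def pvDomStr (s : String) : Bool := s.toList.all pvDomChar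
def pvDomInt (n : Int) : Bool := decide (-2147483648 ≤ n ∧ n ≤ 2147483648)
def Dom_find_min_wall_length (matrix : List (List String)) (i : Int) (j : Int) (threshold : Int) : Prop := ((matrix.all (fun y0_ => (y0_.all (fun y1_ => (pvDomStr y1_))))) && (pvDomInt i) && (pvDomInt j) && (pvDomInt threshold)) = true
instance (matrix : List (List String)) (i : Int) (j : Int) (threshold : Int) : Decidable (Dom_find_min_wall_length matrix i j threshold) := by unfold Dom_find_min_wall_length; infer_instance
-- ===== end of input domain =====

-- B replaces A's FIFO worklist by whole-grid Bellman relaxation to a fixpoint (objective: alternative,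
-- genuinely different traversal; equal value on every input admitted by Pre_).

-- ===== PORT A =====
-- shared tiny helpers: the direction list and 2-D list access (Python matrix[x][y]);
-- reads/writes are only performed after the Python has checked 0 ≤ x < rows, 0 ≤ y < cols,
-- and Pre_ guarantees each accessed row is long enough, so the .getD defaults are never hit there.
def dirsA : List (Int × Int) := [(0,1), (1,0), (-1, 0), (0, -1)]

def pyGet2 {α : Type} (g : List (List α)) (x y : Int) (d : α) : α :=
  (PySem.List.pyGet? ((PySem.List.pyGet? g x).getD []) y).getD d

def pySet2 {α : Type} (g : List (List α)) (x y : Int) (v : α) : List (List α) :=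
  g.set x.toNat ((g.getD x.toNat []).set y.toNat v)   -- only used with 0 ≤ x, 0 ≤ y already checked

-- len(matrix[0]) raises on an empty matrix; Pre_ excludes that, headD is exact elsewhere
def is_valid_cell (matrix : List (List String)) (i : Int) (j : Int) : Bool :=
  let rows : Int := matrix.length
  let cols : Int := (matrix.headD []).length
  decide (i < rows) && decide (0 ≤ i) && decide (j < cols) && decide (0 ≤ j)

-- fuel bound helper: max int value of any cell string (0 for unparsable cells)
def maxWt (matrix : List (List String)) : Int :=
  matrix.foldl (fun acc row => row.foldl (fun acc v => max acc ((PySem.Int.ofStr? v).getD 0)) acc) 0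

structure StA where
  queue : List (Int × Int × Int)
  res : Int
  vis : List (List Bool)
  ec : List (List (Option Int))

-- the body of A's `for direction in directions` loop, one direction
def procDirA (matrix : List (List String)) (x y c : Int) (st : StA) (d : Int × Int) : StA :=
  let nx := x + d.1
  let ny := y + d.2
  if is_valid_cell matrix nx ny && !(pyGet2 st.vis nx ny false) then
    let v := pyGet2 matrix nx ny ""
    if v = "A" then { st with res := min st.res c }
    else if v = "." ∨ v = "M" ∨ v = "U" ∨ v = "P" then { st with vis := pySet2 st.vis nx ny true }
    else
      let w := (PySem.Int.ofStr? v).getD 0   -- int(cell_val); Pre_ guarantees it parses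
      match pyGet2 st.ec nx ny (none : Option Int) with   -- float('inf') is `none`
      | none => { st with queue := st.queue ++ [(nx, ny, c + w)], ec := pySet2 st.ec nx ny (some (c + w)) }
      | some u => if u > c + w then { st with queue := st.queue ++ [(nx, ny, c + w)], ec := pySet2 st.ec nx ny (some (c + w)) } else st
  else st

-- A's `while queue` loop; the fuel is a guard only (proved sufficient below)
def loopA (matrix : List (List String)) : Nat → StA → Int
  | 0, st => st.res
  | fuel+1, st =>
    match st.queue with
    | [] => st.res
    | (x, y, c) :: t =>
      if c > st.res then loopA matrix fuel { st with queue := t }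
      else loopA matrix fuel (dirsA.foldl (procDirA matrix x y c) { st with queue := t })

def find_min_wall_length (matrix : List (List String)) (i : Int) (j : Int) (threshold : Int) : Int :=
  let rows := matrix.length
  let cols := (matrix.headD []).length
  loopA matrix (2 + 5 * rows * cols * ((max threshold 0) + maxWt matrix + 2).toNat)
    ⟨[(i, j, 0)], threshold,
     List.replicate rows (List.replicate cols false),
     List.replicate rows (List.replicate cols (none : Option Int))⟩

-- ===== PORT B =====
-- Source B's relaxation attempt for one neighbour direction of cell (r, c) whose distance is d
def stepDirB (matrix : List (List String)) (rows cols r c d : Int)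
    (st : PySem.Dict (Int × Int) Int × Bool) (dir : Int × Int) :
    PySem.Dict (Int × Int) Int × Bool :=
  let nr := r + dir.1
  let nc := c + dir.2
  if 0 ≤ nr ∧ nr < rows ∧ 0 ≤ nc ∧ nc < cols then
    let v := pyGet2 matrix nr nc ""
    if v ≠ "A" ∧ ¬(v = "." ∨ v = "M" ∨ v = "U" ∨ v = "P") then
      let w := (PySem.Int.ofStr? v).getD 0   -- int(v); Pre_ guarantees it parses
      match PySem.Dict.get? st.1 (nr, nc) with
      | none => (PySem.Dict.insert st.1 (nr, nc) (d + w), true)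
      | some u => if d + w < u then (PySem.Dict.insert st.1 (nr, nc) (d + w), true) else st
    else st
  else st

-- the body of Source B's `if (r, c) in dist:` block
def cellBodyB (matrix : List (List String)) (rows cols : Int)
    (st : PySem.Dict (Int × Int) Int × Bool) (r c : Int) :
    PySem.Dict (Int × Int) Int × Bool :=
  match PySem.Dict.get? st.1 (r, c) with
  | none => st
  | some d => dirsA.foldl (stepDirB matrix rows cols r c d) st

-- one full `for r ... for c ...` sweep of Source B's while-loop body; returns (dist, changed)
def sweepB (matrix : List (List String)) (dist0 : PySem.Dict (Int × Int) Int) :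
    PySem.Dict (Int × Int) Int × Bool :=
  let rows : Int := matrix.length
  let cols : Int := (matrix.headD []).length
  (PySem.List.pyRange 0 rows 1).foldl (fun st r =>
    (PySem.List.pyRange 0 cols 1).foldl (fun st c => cellBodyB matrix rows cols st r c) st)
    (dist0, false)

-- Source B's `while changed` loop; fuel is a guard only (proved sufficient below)
def loopB (matrix : List (List String)) : Nat → PySem.Dict (Int × Int) Int → PySem.Dict (Int × Int) Int
  | 0, dist => dist
  | fuel+1, dist =>
    match sweepB matrix dist with
    | (dist', changed) => if changed then loopB matrix fuel dist' else dist'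

-- seeding of the start's neighbours (Source B's first `for dr, dc in dirs` loop)
def seedStepB (matrix : List (List String)) (rows cols i j : Int)
    (st : Int × PySem.Dict (Int × Int) Int) (dir : Int × Int) :
    Int × PySem.Dict (Int × Int) Int :=
  let r := i + dir.1
  let c := j + dir.2
  if 0 ≤ r ∧ r < rows ∧ 0 ≤ c ∧ c < cols then
    let v := pyGet2 matrix r c ""
    if v = "A" then (min st.1 0, st.2)
    else if ¬(v = "." ∨ v = "M" ∨ v = "U" ∨ v = "P") then
      let w := (PySem.Int.ofStr? v).getD 0   -- int(v); Pre_ guarantees it parses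
      match PySem.Dict.get? st.2 (r, c) with
      | none => (st.1, PySem.Dict.insert st.2 (r, c) w)
      | some u => if w < u then (st.1, PySem.Dict.insert st.2 (r, c) w) else st
    else st
  else st

-- Source B's final collection loop, one direction of one dict item
def collectDirB (matrix : List (List String)) (rows cols : Int) (p : (Int × Int) × Int)
    (best : Int) (dir : Int × Int) : Int :=
  let nr := p.1.1 + dir.1
  let nc := p.1.2 + dir.2
  if (0 ≤ nr ∧ nr < rows ∧ 0 ≤ nc ∧ nc < cols) ∧ pyGet2 matrix nr nc "" = "A" then
    min best p.2
  else best

def collectCellB (matrix : List (List String)) (rows cols : Int) (best : Int)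
    (p : (Int × Int) × Int) : Int :=
  dirsA.foldl (collectDirB matrix rows cols p) best

def find_min_wall_length_alt (matrix : List (List String)) (i : Int) (j : Int) (threshold : Int) : Int :=
  let rows : Int := matrix.length
  let cols : Int := (matrix.headD []).length
  let seeded := dirsA.foldl (seedStepB matrix rows cols i j) (threshold, PySem.Dict.empty)
  let dist := loopB matrix
      (matrix.length * (matrix.headD []).length *
        ((maxWt matrix * (matrix.length * (matrix.headD []).length + 1)).toNat + 2) + 2)
      seeded.2
  (PySem.Dict.items dist).foldl (collectCellB matrix rows cols) seeded.1

-- ===== PRECONDITION & SPEC =====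
-- Pre_ admits (a) any non-empty grid when all four neighbours of the start lie outside the grid
-- (then neither program ever reads a cell and both return threshold), and (b) non-empty
-- rectangular-enough grids (every row at least as long as row 0; A never reads beyond column
-- len(matrix[0])-1) whose first len(matrix[0]) entries per row are "A", ".", "M", "U", "P" or a
-- string int() parses to a NONNEGATIVE value.  Excluded and why: grids with an unparsable cell
-- near the start (A raises ValueError when it reaches one, and may return only while the cell is
-- unreached), rows shorter than row 0 (A raises IndexError when a neighbour access hits one), and
-- grids containing a negative wall length, on which A's pruning and termination are unsound (A can
-- loop forever on a negative cycle, and where it returns its threshold-pruning can miss the true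
-- minimum; see the cites in claim.json).
def GoodCellStr (v : String) : Prop :=
  v = "A" ∨ v = "." ∨ v = "M" ∨ v = "U" ∨ v = "P" ∨ 0 ≤ (PySem.Int.ofStr? v).getD (-1)

def pvInb (matrix : List (List String)) (x y : Int) : Prop :=
  0 ≤ x ∧ x < (matrix.length : Int) ∧ 0 ≤ y ∧ y < ((matrix.headD []).length : Int)

def Pre_find_min_wall_length (matrix : List (List String)) (i : Int) (j : Int) (threshold : Int) : Prop :=
  matrix ≠ [] ∧
  ((¬ pvInb matrix i (j + 1) ∧ ¬ pvInb matrix (i + 1) j ∧ ¬ pvInb matrix (i - 1) j ∧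
      ¬ pvInb matrix i (j - 1)) ∨
   ((matrix.headD []) ≠ [] ∧
    ∀ row ∈ matrix, (matrix.headD []).length ≤ row.length ∧
      ∀ v ∈ row.take (matrix.headD []).length, GoodCellStr v))

instance (matrix : List (List String)) (i : Int) (j : Int) (threshold : Int) : Decidable (Pre_find_min_wall_length matrix i j threshold) := by
  unfold Pre_find_min_wall_length pvInb GoodCellStr; infer_instance

def pvWitness_find_min_wall_length : List (List String) × Int × Int × Int :=
  ([["1", "A"], ["2", "3"]], 0, 0, 10)

def Spec_find_min_wall_length (matrix : List (List String)) (i : Int) (j : Int) (threshold : Int) (out : Int) : Prop := out = find_min_wall_length_alt matrix i j threshold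
instance (matrix : List (List String)) (i : Int) (j : Int) (threshold : Int) (out : Int) : Decidable (Spec_find_min_wall_length matrix i j threshold out) := by unfold Spec_find_min_wall_length; infer_instance

-- ===== CLAIM (what is proved, stated in full; the proofs are below) =====
def Claim_equal_find_min_wall_length : Prop := ∀ (matrix : List (List String)) (i : Int) (j : Int) (threshold : Int), Dom_find_min_wall_length matrix i j threshold → Pre_find_min_wall_length matrix i j threshold → Spec_find_min_wall_length matrix i j threshold (find_min_wall_length matrix i j threshold)

-- ===== LEMMAS AND PROOFS =====

theorem pvWitness_ok :
    Dom_find_min_wall_length (pvWitness_find_min_wall_length.1) (pvWitness_find_min_wall_length.2.1) (pvWitness_find_min_wall_length.2.2.1) (pvWitness_find_min_wall_length.2.2.2) ∧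
    Pre_find_min_wall_length (pvWitness_find_min_wall_length.1) (pvWitness_find_min_wall_length.2.1) (pvWitness_find_min_wall_length.2.2.1) (pvWitness_find_min_wall_length.2.2.2) := by
  constructor <;> decide

-- ---------- proof-side vocabulary ----------

def rowsI (m : List (List String)) : Int := m.length
def colsI (m : List (List String)) : Int := (m.headD []).length

def validC (m : List (List String)) (x y : Int) : Prop :=
  0 ≤ x ∧ x < rowsI m ∧ 0 ≤ y ∧ y < colsI m

def cellV (m : List (List String)) (x y : Int) : String := pyGet2 m x y ""

def blockedV (v : String) : Prop := v = "." ∨ v = "M" ∨ v = "U" ∨ v = "P"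

def digitC (m : List (List String)) (x y : Int) : Prop :=
  validC m x y ∧ cellV m x y ≠ "A" ∧ ¬ blockedV (cellV m x y)

def wtC (m : List (List String)) (x y : Int) : Int :=
  (PySem.Int.ofStr? (cellV m x y)).getD 0

inductive ReachP (m : List (List String)) (si sj : Int) : Int → Int → Int → Prop
  | base : ReachP m si sj si sj 0
  | step {x y c : Int} (d : Int × Int) :
      ReachP m si sj x y c → d ∈ dirsA → digitC m (x + d.1) (y + d.2) →
      ReachP m si sj (x + d.1) (y + d.2) (c + wtC m (x + d.1) (y + d.2))

def GoalAt (m : List (List String)) (x y : Int) : Prop :=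
  ∃ d ∈ dirsA, validC m (x + d.1) (y + d.2) ∧ cellV m (x + d.1) (y + d.2) = "A"

def SGood (m : List (List String)) (si sj th c : Int) : Prop :=
  c = th ∨ ∃ x y, ReachP m si sj x y c ∧ GoalAt m x y

def IsBest (m : List (List String)) (si sj th r : Int) : Prop :=
  SGood m si sj th r ∧ ∀ c, SGood m si sj th c → r ≤ c

theorem IsBest_unique {m : List (List String)} {si sj th r r' : Int}
    (h : IsBest m si sj th r) (h' : IsBest m si sj th r') : r = r' :=
  le_antisymm (h.2 r' h'.1) (h'.2 r h.1)

-- ---------- Pre_-derived cell facts ----------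

theorem pyGet2_eq_getElem {α : Type} (g : List (List α)) (x y : Int) (d : α)
    (hx0 : 0 ≤ x) (hx : x.toNat < g.length) (hy0 : 0 ≤ y) (hy : y.toNat < (g[x.toNat]).length) :
    pyGet2 g x y d = g[x.toNat][y.toNat] := by
  unfold pyGet2
  rw [PySem.List.pyGet?_of_nonneg g hx0, List.getElem?_eq_getElem hx]
  simp only [Option.getD_some]
  rw [PySem.List.pyGet?_of_nonneg _ hy0, List.getElem?_eq_getElem hy]
  rfl

def PreM (m : List (List String)) : Prop :=
  m ≠ [] ∧ (m.headD []) ≠ [] ∧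
  ∀ row ∈ m, (m.headD []).length ≤ row.length ∧
    ∀ v ∈ row.take (m.headD []).length, GoodCellStr v

theorem cell_good {m : List (List String)}
    (hpre : PreM m) {x y : Int} (hv : validC m x y) :
    GoodCellStr (cellV m x y) := by
  obtain ⟨hx0, hx1, hy0, hy1⟩ := hv
  simp only [rowsI] at hx1
  simp only [colsI] at hy1
  have hxlt : x.toNat < m.length := by omega
  have hrow : m[x.toNat] ∈ m := List.getElem_mem _
  obtain ⟨hlen, hgood⟩ := hpre.2.2 _ hrow
  have hylt : y.toNat < (m.headD []).length := by omega
  have hcell : cellV m x y = m[x.toNat][y.toNat]'(by omega) :=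
    pyGet2_eq_getElem m x y "" hx0 hxlt hy0 (by omega)
  rw [hcell]
  apply hgood
  rw [List.mem_take_iff_getElem]
  exact ⟨y.toNat, by omega, rfl⟩

theorem digit_parse {m : List (List String)}
    (hpre : PreM m) {x y : Int} (hd : digitC m x y) :
    PySem.Int.ofStr? (cellV m x y) = some (wtC m x y) ∧ 0 ≤ wtC m x y := by
  obtain ⟨hv, hna, hnb⟩ := hd
  have hg := cell_good hpre hv
  unfold GoodCellStr at hg
  unfold blockedV at hnb
  rcases hg with h | h | h | h | h | h
  · exact absurd h hna
  · exact absurd (Or.inl h) hnb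
  · exact absurd (Or.inr (Or.inl h)) hnb
  · exact absurd (Or.inr (Or.inr (Or.inl h))) hnb
  · exact absurd (Or.inr (Or.inr (Or.inr h))) hnb
  · unfold wtC
    cases hof : PySem.Int.ofStr? (cellV m x y) with
    | none => rw [hof] at h; norm_num at h
    | some w => rw [hof] at h; exact ⟨rfl, by simpa using h⟩

-- nested running-max facts for maxWt
theorem foldl2_le_init (g : String → Int) (m : List (List String)) :
    ∀ init : Int, init ≤ m.foldl (fun acc row => row.foldl (fun a v => max a (g v)) acc) init := by
  induction m with
  | nil => intro init; simp
  | cons r m ih =>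
    intro init
    have h1 : init ≤ r.foldl (fun a v => max a (g v)) init :=
      (PySem.List.le_foldl_max_int r g init).1
    simpa using le_trans h1 (ih _)

theorem mem_foldl2 (g : String → Int) (m : List (List String)) :
    ∀ init : Int, ∀ row ∈ m, ∀ v ∈ row,
      g v ≤ m.foldl (fun acc row => row.foldl (fun a v => max a (g v)) acc) init := by
  induction m with
  | nil => intro _ row h; simp at h
  | cons r m ih =>
    intro init row hrow v hv
    rcases List.mem_cons.mp hrow with rfl | hrow
    · have h1 : g v ≤ row.foldl (fun a v => max a (g v)) init :=
        (PySem.List.le_foldl_max_int row g init).2 v hv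
      simpa using le_trans h1 (foldl2_le_init g m _)
    · simpa using ih _ row hrow v hv

theorem maxWt_nonneg (m : List (List String)) : 0 ≤ maxWt m :=
  foldl2_le_init (fun v => (PySem.Int.ofStr? v).getD 0) m 0

theorem wt_le_maxWt {m : List (List String)} {x y : Int} (hv : validC m x y) :
    wtC m x y ≤ maxWt m := by
  obtain ⟨hx0, hx1, hy0, hy1⟩ := hv
  simp only [rowsI] at hx1
  simp only [colsI] at hy1
  have hxlt : x.toNat < m.length := by omega
  by_cases hylt : y.toNat < (m[x.toNat]).length
  · have hcell : cellV m x y = m[x.toNat][y.toNat] :=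
      pyGet2_eq_getElem m x y "" hx0 hxlt hy0 hylt
    unfold wtC
    rw [hcell]
    exact mem_foldl2 _ m 0 _ (List.getElem_mem _) _ (List.getElem_mem _)
  · -- the accessed row is too short: cellV is the default "" whose weight is 0
    unfold wtC cellV pyGet2
    rw [PySem.List.pyGet?_of_nonneg m hx0, List.getElem?_eq_getElem hxlt]
    simp only [Option.getD_some]
    rw [PySem.List.pyGet?_of_nonneg _ hy0, List.getElem?_eq_none (by omega)]
    simpa using maxWt_nonneg m

-- ---------- 2-D list lemmas ----------

theorem pyGet2_replicate {α : Type} (r c : Nat) (a : α) (x y : Int) :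
    pyGet2 (List.replicate r (List.replicate c a)) x y a = a := by
  unfold pyGet2
  cases h1 : PySem.List.pyGet? (List.replicate r (List.replicate c a)) x with
  | none => simp [PySem.List.pyGet?]
  | some row =>
    have hrow := PySem.List.mem_of_pyGet?_eq_some _ h1
    rw [List.eq_of_mem_replicate hrow]
    simp only [Option.getD_some]
    cases h2 : PySem.List.pyGet? (List.replicate c a) y with
    | none => simp
    | some v =>
      have hv := PySem.List.mem_of_pyGet?_eq_some _ h2
      rw [List.eq_of_mem_replicate hv]
      rfl

def Dims2 {α : Type} (g : List (List α)) (m : List (List String)) : Prop :=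
  g.length = m.length ∧ ∀ row ∈ g, row.length = (m.headD []).length

theorem Dims2_replicate {α : Type} (m : List (List String)) (a : α) :
    Dims2 (List.replicate m.length (List.replicate (m.headD []).length a)) m := by
  constructor
  · simp
  · intro row hrow
    rw [List.eq_of_mem_replicate hrow]
    simp

theorem Dims2_set2 {α : Type} {g : List (List α)} {m : List (List String)}
    (hd : Dims2 g m) (x y : Int) (v : α) : Dims2 (pySet2 g x y v) m := by
  obtain ⟨h1, h2⟩ := hd
  constructor
  · simp [pySet2, h1]
  · intro row hrow
    unfold pySet2 at hrow
    by_cases hx : x.toNat < g.length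
    · rcases List.mem_or_eq_of_mem_set hrow with h | h
      · exact h2 _ h
      · subst h
        rw [List.length_set, List.getD_eq_getElem?_getD, List.getElem?_eq_getElem hx,
          Option.getD_some]
        exact h2 _ (List.getElem_mem hx)
    · rw [List.set_eq_of_length_le (by omega)] at hrow
      exact h2 _ hrow

theorem pyGet2_nn {α : Type} (g : List (List α)) {x y : Int} (hx0 : 0 ≤ x) (hy0 : 0 ≤ y)
    (dft : α) :
    pyGet2 g x y dft = (((g[x.toNat]?).getD [])[y.toNat]?).getD dft := by
  unfold pyGet2
  rw [PySem.List.pyGet?_of_nonneg g hx0, PySem.List.pyGet?_of_nonneg _ hy0]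

theorem pyGet2_set2 {α : Type} {g : List (List α)} {m : List (List String)}
    (hd : Dims2 g m) {x y : Int} (hv : validC m x y) (v : α) {x' y' : Int}
    (hv' : validC m x' y') (dft : α) :
    pyGet2 (pySet2 g x y v) x' y' dft =
      if x' = x ∧ y' = y then v else pyGet2 g x' y' dft := by
  obtain ⟨hx0, hx1, hy0, hy1⟩ := hv
  obtain ⟨hx0', hx1', hy0', hy1'⟩ := hv'
  simp only [rowsI, colsI] at hx1 hx1' hy1 hy1'
  obtain ⟨hg1, hg2⟩ := hd
  have hxg : x.toNat < g.length := by rw [hg1]; omega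
  have hrow_eq : g.getD x.toNat [] = g[x.toNat] := by
    rw [List.getD_eq_getElem?_getD, List.getElem?_eq_getElem hxg, Option.getD_some]
  have hrowlen : (g.getD x.toNat []).length = (m.headD []).length := by
    rw [hrow_eq]; exact hg2 _ (List.getElem_mem hxg)
  rw [pyGet2_nn _ hx0' hy0', pyGet2_nn _ hx0' hy0']
  unfold pySet2
  by_cases hxx : x'.toNat = x.toNat
  · have hxeq : x' = x := by omega
    rw [List.getElem?_set, if_pos hxx.symm, if_pos hxg]
    simp only [Option.getD_some]
    by_cases hyy : y'.toNat = y.toNat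
    · have hyeq : y' = y := by omega
      have hylen : y.toNat < (g.getD x.toNat []).length := by rw [hrowlen]; omega
      rw [List.getElem?_set, if_pos hyy.symm, if_pos hylen, if_pos ⟨hxeq, hyeq⟩]
      rfl
    · have hne : ¬ (x' = x ∧ y' = y) := by rintro ⟨-, h⟩; subst h; omega
      rw [List.getElem?_set_ne (by omega), if_neg hne, hrow_eq, hxx,
        List.getElem?_eq_getElem hxg, Option.getD_some]
  · have hne : ¬ (x' = x ∧ y' = y) := by rintro ⟨h, -⟩; subst h; omega
    rw [List.getElem?_set_ne (by omega), if_neg hne]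

-- ---------- the grid's cell list, sums and counting ----------

def cellList (m : List (List String)) : List (Int × Int) :=
  (PySem.List.pyRange 0 (rowsI m) 1).flatMap
    (fun x => (PySem.List.pyRange 0 (colsI m) 1).map (fun y => (x, y)))

theorem mem_cellList {m : List (List String)} {p : Int × Int} :
    p ∈ cellList m ↔ validC m p.1 p.2 := by
  unfold cellList validC
  rw [List.mem_flatMap]
  constructor
  · rintro ⟨x, hx, hp⟩
    rw [List.mem_map] at hp
    obtain ⟨y, hy, rfl⟩ := hp
    rw [PySem.List.mem_pyRange_one] at hx hy
    exact ⟨hx.1, hx.2, hy.1, hy.2⟩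
  · rintro ⟨h1, h2, h3, h4⟩
    refine ⟨p.1, ?_, ?_⟩
    · rw [PySem.List.mem_pyRange_one]; exact ⟨h1, h2⟩
    · rw [List.mem_map]
      exact ⟨p.2, by rw [PySem.List.mem_pyRange_one]; exact ⟨h3, h4⟩, rfl⟩

theorem nodup_cellList (m : List (List String)) : (cellList m).Nodup := by
  unfold cellList
  rw [List.nodup_flatMap]
  constructor
  · intro x _
    exact (PySem.List.nodup_pyRange_one _ _).map (by intro a b h; simpa using h)
  · have hnd := PySem.List.nodup_pyRange_one (0 : Int) (rowsI m)
    refine List.Pairwise.imp ?_ (hnd.pairwise_of_forall_ne (fun a _ b _ h => h))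
    intro a b hab
    intro p hpa hpb
    rw [List.mem_map] at hpa hpb
    obtain ⟨ya, _, rfl⟩ := hpa
    obtain ⟨yb, _, h⟩ := hpb
    exact hab (by simpa using congrArg Prod.fst h.symm)

theorem length_cellList (m : List (List String)) :
    (cellList m).length = m.length * (m.headD []).length := by
  unfold cellList
  rw [List.length_flatMap]
  have : ∀ x : Int, ((PySem.List.pyRange 0 (colsI m) 1).map (fun y => (x, y))).length
      = (m.headD []).length := by
    intro x
    rw [List.length_map, PySem.List.length_pyRange_one]
    simp [colsI]
  rw [List.map_congr_left (fun x _ => this x)]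
  rw [List.map_const', List.sum_replicate, PySem.List.length_pyRange_one]
  simp [rowsI, smul_eq_mul]

theorem countP_flip {l : List (Int × Int)} (hnd : l.Nodup) {a : Int × Int} (ha : a ∈ l)
    {p p' : Int × Int → Bool} (hpa : p a = false) (hpa' : p' a = true)
    (hother : ∀ b ∈ l, b ≠ a → p' b = p b) : l.countP p' = l.countP p + 1 := by
  induction l with
  | nil => simp at ha
  | cons x t ih =>
    rw [List.countP_cons, List.countP_cons]
    rcases List.mem_cons.mp ha with rfl | hat
    · have ht : ∀ b ∈ t, p' b = p b := fun b hb =>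
        hother b (List.mem_cons_of_mem _ hb) (fun h => (List.nodup_cons.mp hnd).1 (h ▸ hb))
      rw [List.countP_congr (fun b hb => by rw [ht b hb]), hpa, hpa']
      simp
    · have hxa : x ≠ a := fun h => (List.nodup_cons.mp hnd).1 (h ▸ hat)
      rw [hother x (List.mem_cons_self) hxa,
        ih (List.nodup_cons.mp hnd).2 hat (fun b hb hba => hother b (List.mem_cons_of_mem _ hb) hba)]
      omega

-- ---------- A-side invariants ----------

theorem is_valid_cell_iff (m : List (List String)) (x y : Int) :
    is_valid_cell m x y = true ↔ validC m x y := by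
  simp only [is_valid_cell, validC, rowsI, colsI, Bool.and_eq_true, decide_eq_true_eq]
  tauto

def ECLe (m : List (List String)) (ec' ec : List (List (Option Int))) : Prop :=
  ∀ x y : Int, validC m x y → ∀ v : Int, pyGet2 ec x y (none : Option Int) = some v →
    ∃ v', pyGet2 ec' x y (none : Option Int) = some v' ∧ v' ≤ v

theorem ECLe_refl (m : List (List String)) (ec : List (List (Option Int))) : ECLe m ec ec :=
  fun _ _ _ v hv => ⟨v, hv, le_refl v⟩

theorem ECLe_trans {m : List (List String)} {e1 e2 e3 : List (List (Option Int))}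
    (h12 : ECLe m e1 e2) (h23 : ECLe m e2 e3) : ECLe m e1 e3 := by
  intro x y hv v h3
  obtain ⟨v2, h2, hle2⟩ := h23 x y hv v h3
  obtain ⟨v1, h1, hle1⟩ := h12 x y hv v2 h2
  exact ⟨v1, h1, le_trans hle1 hle2⟩

def RelaxedA (m : List (List String)) (res : Int) (ec : List (List (Option Int)))
    (dl : List (Int × Int)) (x y v : Int) : Prop :=
  ∀ d ∈ dl, validC m (x + d.1) (y + d.2) →
    (cellV m (x + d.1) (y + d.2) = "A" → res ≤ v) ∧
    (digitC m (x + d.1) (y + d.2) →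
      ∃ u, pyGet2 ec (x + d.1) (y + d.2) (none : Option Int) = some u ∧
        u ≤ v + wtC m (x + d.1) (y + d.2))

theorem RelaxedA_mono {m : List (List String)} {res res' : Int}
    {ec ec' : List (List (Option Int))} {dl : List (Int × Int)} {x y v : Int}
    (hres : res' ≤ res) (hec : ECLe m ec' ec) (h : RelaxedA m res ec dl x y v) :
    RelaxedA m res' ec' dl x y v := by
  intro d hd hval
  obtain ⟨hA, hD⟩ := h d hd hval
  refine ⟨fun hc => le_trans hres (hA hc), fun hdig => ?_⟩
  obtain ⟨u, hu, hule⟩ := hD hdig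
  obtain ⟨u', hu', hule'⟩ := hec _ _ hval u hu
  exact ⟨u', hu', le_trans hule' hule⟩

def InvCore (m : List (List String)) (si sj th : Int) (st : StA) : Prop :=
  (∀ x y c : Int, (x, y, c) ∈ st.queue →
      (x = si ∧ y = sj ∧ c = 0) ∨ (digitC m x y ∧ ReachP m si sj x y c ∧ 0 ≤ c))
  ∧ st.res ≤ th
  ∧ SGood m si sj th st.res
  ∧ (∀ x y v : Int, validC m x y → pyGet2 st.ec x y (none : Option Int) = some v →
      digitC m x y ∧ ReachP m si sj x y v ∧ 0 ≤ v ∧ v ≤ max th 0 + maxWt m)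
  ∧ (∀ x y : Int, validC m x y → pyGet2 st.vis x y false = true → blockedV (cellV m x y))
  ∧ Dims2 st.vis m ∧ Dims2 st.ec m

def potA (m : List (List String)) (th : Int) (o : Option Int) : Nat :=
  match o with
  | none => ((max th 0) + maxWt m + 2).toNat
  | some v => v.toNat + 1

def sumPotA (m : List (List String)) (th : Int) (ec : List (List (Option Int))) : Nat :=
  ((cellList m).map (fun p => potA m th (pyGet2 ec p.1 p.2 (none : Option Int)))).sum

def muA (m : List (List String)) (th : Int) (st : StA) : Nat :=
  st.queue.length + 5 * sumPotA m th st.ec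

def InvA (m : List (List String)) (si sj th : Int) (st : StA) : Prop :=
  InvCore m si sj th st
  ∧ (∀ x y v : Int, validC m x y → pyGet2 st.ec x y (none : Option Int) = some v →
      v ≤ st.res → ((x, y, v) ∈ st.queue ∨ RelaxedA m st.res st.ec dirsA x y v))
  ∧ ((si, sj, 0) ∈ st.queue ∨ RelaxedA m st.res st.ec dirsA si sj 0 ∨ st.res < 0)

theorem sumPotA_push {m : List (List String)} (th : Int) {ec : List (List (Option Int))}
    (hd : Dims2 ec m) {nx ny : Int} (hv : validC m nx ny) {nv : Int}
    (hlt : potA m th (some nv) < potA m th (pyGet2 ec nx ny (none : Option Int))) :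
    sumPotA m th (pySet2 ec nx ny (some nv)) < sumPotA m th ec := by
  unfold sumPotA
  apply List.sum_lt_sum
  · intro p hp
    have hvp := mem_cellList.mp hp
    rw [pyGet2_set2 hd hv _ hvp]
    by_cases h : p.1 = nx ∧ p.2 = ny
    · rw [if_pos h]
      have : p = (nx, ny) := by obtain ⟨h1, h2⟩ := h; exact Prod.ext h1 h2
      rw [this] at hvp ⊢ <;> exact le_of_lt (by simpa using hlt)
    · rw [if_neg h]
  · refine ⟨(nx, ny), mem_cellList.mpr hv, ?_⟩
    rw [pyGet2_set2 hd hv _ hv, if_pos ⟨rfl, rfl⟩]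
    exact hlt

theorem procDirA_step {m : List (List String)} (si sj th : Int) (hpre : PreM m)
    {x y c : Int} (hreach : ReachP m si sj x y c) (hc0 : 0 ≤ c)
    (st : StA) (d : Int × Int) (hd : d ∈ dirsA)
    (hcres : c ≤ st.res) (hcore : InvCore m si sj th st) :
    InvCore m si sj th (procDirA m x y c st d) ∧
    (procDirA m x y c st d).res ≤ st.res ∧ c ≤ (procDirA m x y c st d).res ∧
    ECLe m (procDirA m x y c st d).ec st.ec ∧
    (∀ e, e ∈ st.queue → e ∈ (procDirA m x y c st d).queue) ∧
    (∀ x' y' v : Int, validC m x' y' →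
      pyGet2 (procDirA m x y c st d).ec x' y' (none : Option Int) = some v →
      pyGet2 st.ec x' y' (none : Option Int) = some v ∨ (x', y', v) ∈ (procDirA m x y c st d).queue) ∧
    (validC m (x + d.1) (y + d.2) →
      (cellV m (x + d.1) (y + d.2) = "A" → (procDirA m x y c st d).res ≤ c) ∧
      (digitC m (x + d.1) (y + d.2) →
        ∃ u, pyGet2 (procDirA m x y c st d).ec (x + d.1) (y + d.2) (none : Option Int) = some u ∧
          u ≤ c + wtC m (x + d.1) (y + d.2))) ∧
    (procDirA m x y c st d).queue.length + 5 * sumPotA m th (procDirA m x y c st d).ec ≤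
      st.queue.length + 5 * sumPotA m th st.ec := by
  obtain ⟨hI1, hI2, hI3, hI4, hI5, hDV, hDE⟩ := hcore
  set nx := x + d.1 with hnx
  set ny := y + d.2 with hny
  unfold procDirA
  simp only [← hnx, ← hny]
  by_cases hguard : is_valid_cell m nx ny = true ∧ pyGet2 st.vis nx ny false = false
  · have hval : validC m nx ny := (is_valid_cell_iff m nx ny).mp hguard.1
    rw [if_pos (by rw [hguard.1, hguard.2]; rfl)]
    by_cases hA : pyGet2 m nx ny "" = "A"
    · rw [if_pos hA]
      have hcell : cellV m nx ny = "A" := hA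
      have hsg : SGood m si sj th (min st.res c) := by
        rcases min_cases st.res c with ⟨heq, -⟩ | ⟨heq, -⟩
        · rw [heq]; exact hI3
        · rw [heq]; exact Or.inr ⟨x, y, hreach, ⟨d, hd, hval, hcell⟩⟩
      refine ⟨⟨hI1, le_trans (min_le_left _ _) hI2, hsg, hI4, hI5, hDV, hDE⟩,
        min_le_left _ _, le_min hcres le_rfl, ECLe_refl m _, fun e he => he,
        fun x' y' v hv' hec => Or.inl hec, fun _ => ⟨fun _ => min_le_right _ _, fun hdig => ?_⟩,
        le_rfl⟩
      exact absurd hcell hdig.2.1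
    · rw [if_neg hA]
      by_cases hB : pyGet2 m nx ny "" = "." ∨ pyGet2 m nx ny "" = "M" ∨
          pyGet2 m nx ny "" = "U" ∨ pyGet2 m nx ny "" = "P"
      · rw [if_pos hB]
        have hbl : blockedV (cellV m nx ny) := hB
        refine ⟨⟨hI1, hI2, hI3, hI4, ?_, Dims2_set2 hDV nx ny true, hDE⟩,
          le_rfl, hcres, ECLe_refl m _, fun e he => he,
          fun x' y' v hv' hec => Or.inl hec,
          fun _ => ⟨fun hcell => absurd hcell (by
            rcases hbl with h | h | h | h <;> rw [h] <;> decide), fun hdig => absurd hbl hdig.2.2⟩,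
          le_rfl⟩
        intro x' y' hv' hvis
        rw [pyGet2_set2 hDV hval _ hv'] at hvis
        by_cases hxy : x' = nx ∧ y' = ny
        · obtain ⟨rfl, rfl⟩ := hxy; exact hbl
        · rw [if_neg hxy] at hvis; exact hI5 x' y' hv' hvis
      · rw [if_neg hB]
        have hdig : digitC m nx ny := ⟨hval, hA, hB⟩
        have hw := digit_parse hpre hdig
        have hwmax : wtC m nx ny ≤ maxWt m := wt_le_maxWt hval
        have hwt : (PySem.Int.ofStr? (pyGet2 m nx ny "")).getD 0 = wtC m nx ny := rfl
        have hbound : c + wtC m nx ny ≤ max th 0 + maxWt m := by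
          have : c ≤ max th 0 := le_trans hcres (le_trans hI2 (le_max_left _ _))
          omega
        -- the push branch, shared by the `none` and improving `some` cases
        have hpush : ∀ (hlt : potA m th (some (c + wtC m nx ny)) <
              potA m th (pyGet2 st.ec nx ny (none : Option Int))),
            let st' : StA := { st with
              queue := st.queue ++ [(nx, ny, c + wtC m nx ny)],
              ec := pySet2 st.ec nx ny (some (c + wtC m nx ny)) }
            InvCore m si sj th st' ∧
            st'.res ≤ st.res ∧ c ≤ st'.res ∧ ECLe m st'.ec st.ec ∧
            (∀ e, e ∈ st.queue → e ∈ st'.queue) ∧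
            (∀ x' y' v : Int, validC m x' y' →
              pyGet2 st'.ec x' y' (none : Option Int) = some v →
              pyGet2 st.ec x' y' (none : Option Int) = some v ∨ (x', y', v) ∈ st'.queue) ∧
            (validC m nx ny →
              (cellV m nx ny = "A" → st'.res ≤ c) ∧
              (digitC m nx ny →
                ∃ u, pyGet2 st'.ec nx ny (none : Option Int) = some u ∧
                  u ≤ c + wtC m nx ny)) ∧
            st'.queue.length + 5 * sumPotA m th st'.ec ≤
              st.queue.length + 5 * sumPotA m th st.ec := by
          intro hlt
          have hsum := sumPotA_push th hDE hval hlt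
          have hreach' : ReachP m si sj nx ny (c + wtC m nx ny) :=
            ReachP.step d hreach hd hdig
          refine ⟨⟨?_, hI2, hI3, ?_, ?_, hDV, Dims2_set2 hDE nx ny _⟩,
            le_rfl, hcres, ?_, fun e he => List.mem_append_left _ he, ?_, ?_, ?_⟩
          · intro x' y' c' hmem
            rcases List.mem_append.mp hmem with h | h
            · exact hI1 x' y' c' h
            · simp only [List.mem_singleton, Prod.mk.injEq] at h
              obtain ⟨rfl, rfl, rfl⟩ := h
              exact Or.inr ⟨hdig, hreach', by omega⟩
          · intro x' y' v hv' hec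
            rw [pyGet2_set2 hDE hval _ hv'] at hec
            by_cases hxy : x' = nx ∧ y' = ny
            · obtain ⟨rfl, rfl⟩ := hxy
              rw [if_pos ⟨rfl, rfl⟩] at hec
              injection hec with hec
              subst hec
              exact ⟨hdig, hreach', by omega, hbound⟩
            · rw [if_neg hxy] at hec
              exact hI4 x' y' v hv' hec
          · exact hI5
          · intro x' y' hv' v hec
            rw [pyGet2_set2 hDE hval _ hv']
            by_cases hxy : x' = nx ∧ y' = ny
            · obtain ⟨rfl, rfl⟩ := hxy
              rw [if_pos ⟨rfl, rfl⟩]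
              refine ⟨c + wtC m nx ny, rfl, ?_⟩
              -- old value was `some v` and pot strictly decreased, so c+w < v
              have h4 := hI4 nx ny v hv' hec
              rw [hec] at hlt
              simp only [potA] at hlt
              omega
            · rw [if_neg hxy]
              exact ⟨v, hec, le_rfl⟩
          · intro x' y' v hv' hec
            rw [pyGet2_set2 hDE hval _ hv'] at hec
            by_cases hxy : x' = nx ∧ y' = ny
            · obtain ⟨rfl, rfl⟩ := hxy
              rw [if_pos ⟨rfl, rfl⟩] at hec
              injection hec with hec
              exact Or.inr (by rw [← hec]; exact List.mem_append_right _ (List.mem_singleton.mpr rfl))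
            · rw [if_neg hxy] at hec
              exact Or.inl hec
          · intro _
            refine ⟨fun hcell => absurd hcell hA, fun _ => ?_⟩
            rw [pyGet2_set2 hDE hval _ hval, if_pos ⟨rfl, rfl⟩]
            exact ⟨c + wtC m nx ny, rfl, le_rfl⟩
          · simp only [List.length_append, List.length_singleton]
            omega
        cases hec : pyGet2 st.ec nx ny (none : Option Int) with
        | none =>
          have hlt : potA m th (some (c + wtC m nx ny)) <
              potA m th (pyGet2 st.ec nx ny (none : Option Int)) := by
            rw [hec]; simp only [potA]; omega
          dsimp only
          simpa only [hwt] using hpush hlt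
        | some u =>
          by_cases hu : u > c + (PySem.Int.ofStr? (pyGet2 m nx ny "")).getD 0
          · dsimp only
            rw [if_pos hu]
            rw [hwt] at hu
            have hlt : potA m th (some (c + wtC m nx ny)) <
                potA m th (pyGet2 st.ec nx ny (none : Option Int)) := by
              rw [hec]; simp only [potA]; omega
            simpa only [hwt] using hpush hlt
          · dsimp only
            rw [if_neg hu]
            rw [hwt] at hu
            refine ⟨⟨hI1, hI2, hI3, hI4, hI5, hDV, hDE⟩, le_rfl, hcres, ECLe_refl m _,
              fun e he => he, fun x' y' v hv' h => Or.inl h,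
              fun _ => ⟨fun hcell => absurd hcell hA, fun _ => ⟨u, hec, by omega⟩⟩, le_rfl⟩
  · rw [if_neg (by
      intro hcond
      rw [Bool.and_eq_true, Bool.not_eq_true'] at hcond
      exact hguard ⟨hcond.1, hcond.2⟩)]
    refine ⟨⟨hI1, hI2, hI3, hI4, hI5, hDV, hDE⟩, le_rfl, hcres, ECLe_refl m _,
      fun e he => he, fun x' y' v hv' h => Or.inl h, fun hval => ?_, le_rfl⟩
    have hvis : pyGet2 st.vis nx ny false = true := by
      by_contra hf
      exact hguard ⟨(is_valid_cell_iff m nx ny).mpr hval, Bool.not_eq_true _ ▸ hf⟩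
    have hbl := hI5 nx ny hval hvis
    refine ⟨fun hcell => absurd hcell (by rcases hbl with h | h | h | h <;> rw [h] <;> decide),
      fun hdig => absurd hbl hdig.2.2⟩

theorem foldDirsA {m : List (List String)} (si sj th : Int) (hpre : PreM m)
    {x y c : Int} (hreach : ReachP m si sj x y c) (hc0 : 0 ≤ c) :
    ∀ (dl : List (Int × Int)), (∀ d ∈ dl, d ∈ dirsA) → ∀ (st : StA), c ≤ st.res →
      InvCore m si sj th st →
      InvCore m si sj th (dl.foldl (procDirA m x y c) st) ∧
      (dl.foldl (procDirA m x y c) st).res ≤ st.res ∧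
      c ≤ (dl.foldl (procDirA m x y c) st).res ∧
      ECLe m (dl.foldl (procDirA m x y c) st).ec st.ec ∧
      (∀ e, e ∈ st.queue → e ∈ (dl.foldl (procDirA m x y c) st).queue) ∧
      (∀ x' y' v : Int, validC m x' y' →
        pyGet2 (dl.foldl (procDirA m x y c) st).ec x' y' (none : Option Int) = some v →
        pyGet2 st.ec x' y' (none : Option Int) = some v ∨
          (x', y', v) ∈ (dl.foldl (procDirA m x y c) st).queue) ∧
      RelaxedA m (dl.foldl (procDirA m x y c) st).res (dl.foldl (procDirA m x y c) st).ec dl x y c ∧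
      (dl.foldl (procDirA m x y c) st).queue.length +
          5 * sumPotA m th (dl.foldl (procDirA m x y c) st).ec ≤
        st.queue.length + 5 * sumPotA m th st.ec := by
  intro dl
  induction dl with
  | nil =>
    intro _ st hcres hcore
    exact ⟨hcore, le_rfl, hcres, ECLe_refl m _, fun e he => he,
      fun x' y' v _ h => Or.inl h, fun d hd => absurd hd (List.not_mem_nil), le_rfl⟩
  | cons d dl ih =>
    intro hdl st hcres hcore
    have hd : d ∈ dirsA := hdl d List.mem_cons_self
    obtain ⟨S1, S2, S3, S4, S5, S6, S7, S8⟩ :=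
      procDirA_step si sj th hpre hreach hc0 st d hd hcres hcore
    obtain ⟨F1, F2, F3, F4, F5, F6, F7, F8⟩ :=
      ih (fun d' hd' => hdl d' (List.mem_cons_of_mem _ hd')) (procDirA m x y c st d) S3 S1
    simp only [List.foldl_cons]
    refine ⟨F1, le_trans F2 S2, F3, ECLe_trans F4 S4, fun e he => F5 e (S5 e he),
      ?_, ?_, le_trans F8 S8⟩
    · intro x' y' v hv' h
      rcases F6 x' y' v hv' h with h1 | h1
      · rcases S6 x' y' v hv' h1 with h2 | h2
        · exact Or.inl h2
        · exact Or.inr (F5 _ h2)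
      · exact Or.inr h1
    · intro d' hd' hval
      rcases List.mem_cons.mp hd' with rfl | hd'
      · obtain ⟨hA, hD⟩ := S7 hval
        refine ⟨fun hc => le_trans F2 (hA hc), fun hdig => ?_⟩
        obtain ⟨u, hu, hule⟩ := hD hdig
        obtain ⟨u', hu', hule'⟩ := F4 _ _ hval u hu
        exact ⟨u', hu', le_trans hule' hule⟩
      · exact F7 d' hd' hval

theorem popA {m : List (List String)} (si sj th : Int) (hpre : PreM m) (st : StA)
    (x y c : Int) (t : List (Int × Int × Int)) (hq : st.queue = (x, y, c) :: t)
    (hinv : InvA m si sj th st) (hcle : c ≤ st.res) :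
    InvA m si sj th (dirsA.foldl (procDirA m x y c) { st with queue := t }) ∧
    muA m th (dirsA.foldl (procDirA m x y c) { st with queue := t }) < muA m th st := by
  obtain ⟨⟨hI1, hI2, hI3, hI4, hI5, hDV, hDE⟩, hI6, hI7⟩ := hinv
  have hhead : (x, y, c) ∈ st.queue := by rw [hq]; exact List.mem_cons_self
  have hhd := hI1 x y c hhead
  have hreach : ReachP m si sj x y c := by
    rcases hhd with ⟨rfl, rfl, rfl⟩ | ⟨-, h, -⟩
    · exact ReachP.base
    · exact h
  have hc0 : 0 ≤ c := by
    rcases hhd with ⟨-, -, rfl⟩ | ⟨-, -, h⟩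
    · exact le_rfl
    · exact h
  have hcore0 : InvCore m si sj th { st with queue := t } :=
    ⟨fun x' y' c' h => hI1 x' y' c' (by rw [hq]; exact List.mem_cons_of_mem _ h),
      hI2, hI3, hI4, hI5, hDV, hDE⟩
  obtain ⟨F1, F2, F3, F4, F5, F6, F7, F8⟩ :=
    foldDirsA si sj th hpre hreach hc0 dirsA (fun _ h => h) { st with queue := t } hcle hcore0
  refine ⟨⟨F1, ?_, ?_⟩, ?_⟩
  · intro x' y' v hv' hec hvres
    rcases F6 x' y' v hv' hec with hold | hnew
    · rcases hI6 x' y' v hv' hold (le_trans hvres F2) with hmem | hrel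
      · rw [hq] at hmem
        rcases List.mem_cons.mp hmem with heq | hmem
        · simp only [Prod.mk.injEq] at heq
          obtain ⟨rfl, rfl, rfl⟩ := heq
          exact Or.inr F7
        · exact Or.inl (F5 _ hmem)
      · exact Or.inr (RelaxedA_mono F2 F4 hrel)
    · exact Or.inl hnew
  · rcases hI7 with hmem | hrel | hneg
    · rw [hq] at hmem
      rcases List.mem_cons.mp hmem with heq | hmem
      · simp only [Prod.mk.injEq] at heq
        obtain ⟨rfl, rfl, rfl⟩ := heq
        exact Or.inr (Or.inl F7)
      · exact Or.inl (F5 _ hmem)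
    · exact Or.inr (Or.inl (RelaxedA_mono F2 F4 hrel))
    · exact Or.inr (Or.inr (lt_of_le_of_lt F2 hneg))
  · unfold muA
    have hlen : st.queue.length = t.length + 1 := by rw [hq]; rfl
    have e1 : ({ st with queue := t } : StA).res = st.res := rfl
    have e2 : ({ st with queue := t } : StA).queue.length = t.length := rfl
    have e3 : sumPotA m th ({ st with queue := t } : StA).ec = sumPotA m th st.ec := rfl
    omega

theorem pruneA {m : List (List String)} (si sj th : Int) (st : StA)
    (x y c : Int) (t : List (Int × Int × Int)) (hq : st.queue = (x, y, c) :: t)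
    (hinv : InvA m si sj th st) (hgt : st.res < c) :
    InvA m si sj th { st with queue := t } ∧ muA m th { st with queue := t } < muA m th st := by
  obtain ⟨⟨hI1, hI2, hI3, hI4, hI5, hDV, hDE⟩, hI6, hI7⟩ := hinv
  have e1 : ({ st with queue := t } : StA).res = st.res := rfl
  have e2 : ({ st with queue := t } : StA).queue = t := rfl
  have e3 : ({ st with queue := t } : StA).ec = st.ec := rfl
  refine ⟨⟨⟨fun x' y' c' h => hI1 x' y' c' (by rw [hq]; exact List.mem_cons_of_mem _ h),
      hI2, hI3, hI4, hI5, hDV, hDE⟩, ?_, ?_⟩, ?_⟩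
  · intro x' y' v hv' hec hvres
    rcases hI6 x' y' v hv' hec hvres with hmem | hrel
    · rw [hq] at hmem
      rcases List.mem_cons.mp hmem with heq | hmem
      · simp only [Prod.mk.injEq] at heq
        obtain ⟨rfl, rfl, rfl⟩ := heq
        omega
      · exact Or.inl hmem
    · exact Or.inr hrel
  · rcases hI7 with hmem | hrel | hneg
    · rw [hq] at hmem
      rcases List.mem_cons.mp hmem with heq | hmem
      · simp only [Prod.mk.injEq] at heq
        obtain ⟨rfl, rfl, rfl⟩ := heq
        exact Or.inr (Or.inr hgt)
      · exact Or.inl hmem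
    · exact Or.inr (Or.inl hrel)
    · exact Or.inr (Or.inr hneg)
  · unfold muA
    have hlen : st.queue.length = t.length + 1 := by rw [hq]; rfl
    have e4 : sumPotA m th ({ st with queue := t } : StA).ec = sumPotA m th st.ec := rfl
    have e5 : ({ st with queue := t } : StA).queue.length = t.length := rfl
    omega

theorem coveredA {m : List (List String)} {si sj th : Int} (hpre : PreM m) {st : StA}
    (hinv : InvA m si sj th st) (hq : st.queue = []) :
    ∀ x y c : Int, ReachP m si sj x y c →
      st.res ≤ c ∨
      (∃ v, pyGet2 st.ec x y (none : Option Int) = some v ∧ v ≤ c ∧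
        RelaxedA m st.res st.ec dirsA x y v) ∨
      (x = si ∧ y = sj ∧ 0 ≤ c ∧ RelaxedA m st.res st.ec dirsA si sj 0) := by
  obtain ⟨⟨hI1, hI2, hI3, hI4, hI5, hDV, hDE⟩, hI6, hI7⟩ := hinv
  intro x y c hreach
  induction hreach with
  | base =>
    rcases hI7 with hmem | hrel | hneg
    · rw [hq] at hmem; simp at hmem
    · exact Or.inr (Or.inr ⟨rfl, rfl, le_rfl, hrel⟩)
    · exact Or.inl (le_of_lt hneg)
  | step d hr hd hdig ih =>
    rename_i x' y' c'
    have hw0 : 0 ≤ wtC m (x' + d.1) (y' + d.2) := (digit_parse hpre hdig).2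
    have hval : validC m (x' + d.1) (y' + d.2) := hdig.1
    have hnext : ∀ u : Int, pyGet2 st.ec (x' + d.1) (y' + d.2) (none : Option Int) = some u →
        u ≤ c' + wtC m (x' + d.1) (y' + d.2) →
        st.res ≤ c' + wtC m (x' + d.1) (y' + d.2) ∨
        (∃ v, pyGet2 st.ec (x' + d.1) (y' + d.2) (none : Option Int) = some v ∧
          v ≤ c' + wtC m (x' + d.1) (y' + d.2) ∧ RelaxedA m st.res st.ec dirsA (x' + d.1) (y' + d.2) v) ∨
        ((x' + d.1) = si ∧ (y' + d.2) = sj ∧ 0 ≤ c' + wtC m (x' + d.1) (y' + d.2) ∧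
          RelaxedA m st.res st.ec dirsA si sj 0) := by
      intro u hu hule
      by_cases hures : u ≤ st.res
      · rcases hI6 _ _ u hval hu hures with hmem | hrel
        · rw [hq] at hmem; simp at hmem
        · exact Or.inr (Or.inl ⟨u, hu, hule, hrel⟩)
      · exact Or.inl (by omega)
    rcases ih with h | ⟨v, hv, hvc, hrel⟩ | ⟨rfl, rfl, h0c, hrel⟩
    · exact Or.inl (by omega)
    · obtain ⟨u, hu, hule⟩ := (hrel d hd hval).2 hdig
      exact hnext u hu (by omega)
    · obtain ⟨u, hu, hule⟩ := (hrel d hd hval).2 hdig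
      exact hnext u hu (by omega)

theorem emptyA {m : List (List String)} {si sj th : Int} (hpre : PreM m) {st : StA}
    (hinv : InvA m si sj th st) (hq : st.queue = []) : IsBest m si sj th st.res := by
  have hcov := coveredA hpre hinv hq
  obtain ⟨⟨hI1, hI2, hI3, hI4, hI5, hDV, hDE⟩, hI6, hI7⟩ := hinv
  refine ⟨hI3, ?_⟩
  intro c' hc'
  rcases hc' with rfl | ⟨x, y, hre, hgoal⟩
  · exact hI2
  · obtain ⟨d', hd', hvalg, hcellg⟩ := hgoal
    rcases hcov x y c' hre with h | ⟨v, hv, hvc, hrel⟩ | ⟨rfl, rfl, h0c, hrel⟩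
    · exact h
    · exact le_trans ((hrel d' hd' hvalg).1 hcellg) hvc
    · exact le_trans ((hrel d' hd' hvalg).1 hcellg) h0c

theorem loopA_isBest {m : List (List String)} (si sj th : Int) (hpre : PreM m) :
    ∀ (fuel : Nat) (st : StA), InvA m si sj th st → muA m th st < fuel →
      IsBest m si sj th (loopA m fuel st) := by
  intro fuel
  induction fuel with
  | zero => intro st _ hfu; omega
  | succ f ih =>
    intro st hinv hfu
    cases hq : st.queue with
    | nil =>
      have : loopA m (f + 1) st = st.res := by rw [loopA, hq]
      rw [this]
      exact emptyA hpre hinv hq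
    | cons e t =>
      obtain ⟨x, y, c⟩ := e
      by_cases hc : c > st.res
      · have : loopA m (f + 1) st = loopA m f { st with queue := t } := by
          rw [loopA, hq]
          dsimp only
          rw [if_pos hc]
        rw [this]
        obtain ⟨h1, h2⟩ := pruneA si sj th st x y c t hq hinv hc
        exact ih _ h1 (by omega)
      · have : loopA m (f + 1) st =
            loopA m f (dirsA.foldl (procDirA m x y c) { st with queue := t }) := by
          rw [loopA, hq]
          dsimp only
          rw [if_neg hc]
        rw [this]
        obtain ⟨h1, h2⟩ := popA si sj th hpre st x y c t hq hinv (by omega)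
        exact ih _ h1 (by omega)

theorem A_isBest (m : List (List String)) (si sj th : Int)
    (hpm : PreM m) :
    IsBest m si sj th (find_min_wall_length m si sj th) := by
  have hecr : ∀ x y : Int,
      pyGet2 (List.replicate m.length (List.replicate (m.headD []).length (none : Option Int)))
        x y (none : Option Int) = none := fun x y => pyGet2_replicate _ _ _ x y
  have hvisr : ∀ x y : Int,
      pyGet2 (List.replicate m.length (List.replicate (m.headD []).length false)) x y false
        = false := fun x y => pyGet2_replicate _ _ _ x y
  have hinv : InvA m si sj th
      ⟨[(si, sj, 0)], th,
        List.replicate m.length (List.replicate (m.headD []).length false),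
        List.replicate m.length (List.replicate (m.headD []).length (none : Option Int))⟩ := by
    refine ⟨⟨?_, le_rfl, Or.inl rfl, ?_, ?_, Dims2_replicate m false, Dims2_replicate m none⟩,
      ?_, Or.inl (List.mem_singleton.mpr rfl)⟩
    · intro x y c h
      simp only [List.mem_singleton, Prod.mk.injEq] at h
      exact Or.inl h
    · intro x y v _ hec
      rw [hecr x y] at hec
      cases hec
    · intro x y _ hvis
      rw [hvisr x y] at hvis
      cases hvis
    · intro x y v _ hec
      rw [hecr x y] at hec
      cases hec
  have hsum : sumPotA m th
      (List.replicate m.length (List.replicate (m.headD []).length (none : Option Int)))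
      = m.length * (m.headD []).length * ((max th 0) + maxWt m + 2).toNat := by
    unfold sumPotA
    rw [List.map_congr_left (fun p _ => by rw [hecr p.1 p.2])]
    rw [List.map_const', List.sum_replicate, length_cellList, smul_eq_mul]
    rfl
  have hres := loopA_isBest si sj th hpm
      (2 + 5 * m.length * (m.headD []).length * ((max th 0) + maxWt m + 2).toNat)
      ⟨[(si, sj, 0)], th,
        List.replicate m.length (List.replicate (m.headD []).length false),
        List.replicate m.length (List.replicate (m.headD []).length (none : Option Int))⟩
      hinv (by
        unfold muA
        simp only [List.length_singleton]
        rw [hsum]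
        have : 5 * (m.length * (m.headD []).length * ((max th 0) + maxWt m + 2).toNat)
            = 5 * m.length * (m.headD []).length * ((max th 0) + maxWt m + 2).toNat := by ring
        omega)
  exact hres

-- ---------- B-side: definitions ----------

def SoundB (m : List (List String)) (si sj : Int) (dist : PySem.Dict (Int × Int) Int) : Prop :=
  ∀ (p : Int × Int) (v : Int), PySem.Dict.get? dist p = some v →
    digitC m p.1 p.2 ∧ ReachP m si sj p.1 p.2 v ∧ 0 ≤ v

def cntB (m : List (List String)) (dist : PySem.Dict (Int × Int) Int) : Nat :=
  (cellList m).countP (fun p => (PySem.Dict.get? dist p).isSome)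

def CBB (m : List (List String)) (dist : PySem.Dict (Int × Int) Int) : Prop :=
  ∀ (p : Int × Int) (v : Int), PySem.Dict.get? dist p = some v →
    v ≤ maxWt m * (cntB m dist : Int)

def potB (m : List (List String)) (o : Option Int) : Nat :=
  match o with
  | none => (maxWt m * ((m.length * (m.headD []).length : Nat) : Int)).toNat + 1
  | some v => v.toNat

def measB (m : List (List String)) (dist : PySem.Dict (Int × Int) Int) : Nat :=
  ((cellList m).map (fun p => potB m (PySem.Dict.get? dist p))).sum

def DLe (d' d : PySem.Dict (Int × Int) Int) : Prop :=
  ∀ (p : Int × Int) (v : Int), PySem.Dict.get? d p = some v →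
    ∃ v', PySem.Dict.get? d' p = some v' ∧ v' ≤ v

theorem DLe_refl (d : PySem.Dict (Int × Int) Int) : DLe d d :=
  fun _ v h => ⟨v, h, le_rfl⟩

theorem DLe_trans {d1 d2 d3 : PySem.Dict (Int × Int) Int} (h12 : DLe d1 d2) (h23 : DLe d2 d3) :
    DLe d1 d3 := by
  intro p v h3
  obtain ⟨v2, h2, hle2⟩ := h23 p v h3
  obtain ⟨v1, h1, hle1⟩ := h12 p v2 h2
  exact ⟨v1, h1, le_trans hle1 hle2⟩

def FixB (m : List (List String)) (dist : PySem.Dict (Int × Int) Int) : Prop :=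
  ∀ (p : Int × Int) (v : Int), PySem.Dict.get? dist p = some v →
    ∀ dir ∈ dirsA, digitC m (p.1 + dir.1) (p.2 + dir.2) →
      ∃ u, PySem.Dict.get? dist (p.1 + dir.1, p.2 + dir.2) = some u ∧
        u ≤ v + wtC m (p.1 + dir.1) (p.2 + dir.2)

def SeededB (m : List (List String)) (si sj : Int) (dist : PySem.Dict (Int × Int) Int) : Prop :=
  ∀ dir ∈ dirsA, digitC m (si + dir.1) (sj + dir.2) →
    ∃ u, PySem.Dict.get? dist (si + dir.1, sj + dir.2) = some u ∧
      u ≤ wtC m (si + dir.1) (sj + dir.2)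

def GoodB (m : List (List String)) (si sj : Int) (dist0 : PySem.Dict (Int × Int) Int)
    (st : PySem.Dict (Int × Int) Int × Bool) : Prop :=
  SoundB m si sj st.1 ∧ CBB m st.1 ∧ (PySem.Dict.keys st.1).Nodup ∧ DLe st.1 dist0 ∧
  measB m st.1 ≤ measB m dist0 ∧ (st.2 = false → st.1 = dist0) ∧
  (st.2 = true → measB m st.1 < measB m dist0)

-- ---------- B-side: generic fold helpers ----------

theorem foldl_pres {σ β : Type} (P : σ → Prop) (f : σ → β → σ) (l : List β)
    (h : ∀ s x, x ∈ l → P s → P (f s x)) : ∀ s, P s → P (l.foldl f s) := by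
  induction l with
  | nil => intro s hs; exact hs
  | cons x t ih =>
    intro s hs
    exact ih (fun s' x' hx' => h s' x' (List.mem_cons_of_mem _ hx')) _
      (h s x List.mem_cons_self hs)

theorem foldl_flag_mono {σ β : Type} (f : σ × Bool → β → σ × Bool)
    (hmono : ∀ s x, s.2 = true → (f s x).2 = true) (l : List β) :
    ∀ s, s.2 = true → (l.foldl f s).2 = true := by
  induction l with
  | nil => intro s hs; exact hs
  | cons x t ih => intro s hs; exact ih _ (hmono s x hs)

theorem foldl_flag_false {σ β : Type} (f : σ × Bool → β → σ × Bool)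
    (hmono : ∀ s x, s.2 = true → (f s x).2 = true) (l : List β)
    (hkeep : ∀ s x, x ∈ l → (f s x).2 = false → f s x = s) :
    ∀ s, (l.foldl f s).2 = false → l.foldl f s = s ∧ ∀ x ∈ l, f s x = s := by
  induction l with
  | nil => intro s _; exact ⟨rfl, fun x hx => absurd hx (List.not_mem_nil)⟩
  | cons x t ih =>
    intro s hres
    rw [List.foldl_cons] at hres
    have hfx : (f s x).2 = false := by
      by_contra hc
      rw [foldl_flag_mono f hmono t _ (Bool.not_eq_false _ ▸ hc)] at hres
      cases hres
    have hfs : f s x = s := hkeep s x List.mem_cons_self hfx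
    rw [hfs] at hres
    rw [List.foldl_cons, hfs]
    obtain ⟨h1, h2⟩ := ih (fun s' x' hx' => hkeep s' x' (List.mem_cons_of_mem _ hx')) s hres
    refine ⟨h1, fun x' hx' => ?_⟩
    rcases List.mem_cons.mp hx' with rfl | hx'
    · exact hfs
    · exact h2 x' hx'

-- ---------- B-side: measure / count updates ----------

theorem cntB_mono {m : List (List String)} {dist : PySem.Dict (Int × Int) Int}
    (p : Int × Int) (w : Int) :
    cntB m dist ≤ cntB m (PySem.Dict.insert dist p w) := by
  apply List.countP_mono_left
  intro q _ hq
  rw [PySem.Dict.get?_insert]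
  by_cases h : q = p
  · rw [if_pos h]; rfl
  · rw [if_neg h]; exact hq

theorem cntB_insert_new {m : List (List String)} {dist : PySem.Dict (Int × Int) Int}
    {p : Int × Int} (hp : validC m p.1 p.2) (hnone : PySem.Dict.get? dist p = none) (w : Int) :
    cntB m (PySem.Dict.insert dist p w) = cntB m dist + 1 := by
  apply countP_flip (nodup_cellList m) (mem_cellList.mpr hp)
  · rw [hnone]; rfl
  · rw [PySem.Dict.get?_insert, if_pos rfl]; rfl
  · intro b _ hb
    rw [PySem.Dict.get?_insert, if_neg hb]

theorem cntB_insert_old {m : List (List String)} {dist : PySem.Dict (Int × Int) Int}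
    {p : Int × Int} {u : Int} (hu : PySem.Dict.get? dist p = some u) (w : Int) :
    cntB m (PySem.Dict.insert dist p w) = cntB m dist := by
  apply List.countP_congr
  intro q _
  rw [PySem.Dict.get?_insert]
  by_cases h : q = p
  · subst h; rw [if_pos rfl, hu]; simp
  · rw [if_neg h]

theorem cntB_le_cells (m : List (List String)) (dist : PySem.Dict (Int × Int) Int) :
    cntB m dist ≤ m.length * (m.headD []).length := by
  rw [← length_cellList m]
  exact List.countP_le_length

theorem cntB_lt_cells {m : List (List String)} {dist : PySem.Dict (Int × Int) Int}
    {p : Int × Int} (hp : validC m p.1 p.2) (hnone : PySem.Dict.get? dist p = none) :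
    cntB m dist < m.length * (m.headD []).length := by
  rw [← length_cellList m]
  apply lt_of_le_of_ne List.countP_le_length
  intro hEq
  have := List.countP_eq_length.mp hEq p (mem_cellList.mpr hp)
  rw [hnone] at this
  cases this

theorem measB_insert_lt {m : List (List String)} {dist : PySem.Dict (Int × Int) Int}
    {p : Int × Int} (hp : validC m p.1 p.2) {w : Int}
    (hlt : potB m (some w) < potB m (PySem.Dict.get? dist p)) :
    measB m (PySem.Dict.insert dist p w) < measB m dist := by
  unfold measB
  apply List.sum_lt_sum
  · intro q hq
    rw [PySem.Dict.get?_insert]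
    by_cases h : q = p
    · subst h; rw [if_pos rfl]; exact le_of_lt hlt
    · rw [if_neg h]
  · refine ⟨p, mem_cellList.mpr hp, ?_⟩
    rw [PySem.Dict.get?_insert, if_pos rfl]
    exact hlt

theorem foldl_cases {σ β : Type} (f : σ × Bool → β → σ × Bool) (l : List β)
    (hc : ∀ s x, f s x = s ∨ (f s x).2 = true) :
    ∀ s, l.foldl f s = s ∨ (l.foldl f s).2 = true := by
  have hmono : ∀ s x, s.2 = true → (f s x).2 = true := by
    intro s x hs
    rcases hc s x with h | h
    · rw [h]; exact hs
    · exact h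
  induction l with
  | nil => intro s; exact Or.inl rfl
  | cons x t ih =>
    intro s
    rw [List.foldl_cons]
    rcases hc s x with h | h
    · rw [h]; exact ih s
    · exact Or.inr (foldl_flag_mono f hmono t _ h)

theorem stepDirB_cases (m : List (List String)) (rows cols r0 c0 dd : Int)
    (st : PySem.Dict (Int × Int) Int × Bool) (dir : Int × Int) :
    stepDirB m rows cols r0 c0 dd st dir = st ∨
      (stepDirB m rows cols r0 c0 dd st dir).2 = true := by
  unfold stepDirB
  by_cases h1 : 0 ≤ r0 + dir.1 ∧ r0 + dir.1 < rows ∧ 0 ≤ c0 + dir.2 ∧ c0 + dir.2 < cols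
  · rw [if_pos h1]
    by_cases h2 : pyGet2 m (r0 + dir.1) (c0 + dir.2) "" ≠ "A" ∧
        ¬(pyGet2 m (r0 + dir.1) (c0 + dir.2) "" = "." ∨ pyGet2 m (r0 + dir.1) (c0 + dir.2) "" = "M" ∨
          pyGet2 m (r0 + dir.1) (c0 + dir.2) "" = "U" ∨ pyGet2 m (r0 + dir.1) (c0 + dir.2) "" = "P")
    · rw [if_pos h2]
      cases hold : PySem.Dict.get? st.1 (r0 + dir.1, c0 + dir.2) with
      | none => exact Or.inr rfl
      | some u =>
        dsimp only
        by_cases hlt : dd + (PySem.Int.ofStr? (pyGet2 m (r0 + dir.1) (c0 + dir.2) "")).getD 0 < u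
        · rw [if_pos hlt]; exact Or.inr rfl
        · rw [if_neg hlt]; exact Or.inl rfl
    · rw [if_neg h2]; exact Or.inl rfl
  · rw [if_neg h1]; exact Or.inl rfl

theorem cellBodyB_cases (m : List (List String)) (rows cols : Int)
    (st : PySem.Dict (Int × Int) Int × Bool) (r0 c0 : Int) :
    cellBodyB m rows cols st r0 c0 = st ∨ (cellBodyB m rows cols st r0 c0).2 = true := by
  unfold cellBodyB
  cases hold : PySem.Dict.get? st.1 (r0, c0) with
  | none => exact Or.inl rfl
  | some dd =>
    exact foldl_cases _ _ (fun s x => stepDirB_cases m rows cols r0 c0 dd s x) st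

theorem stepDirB_good {m : List (List String)} {si sj : Int} (hpre : PreM m)
    {r0 c0 dd : Int} (hreach : ReachP m si sj r0 c0 dd) (hdd0 : 0 ≤ dd)
    (dist0 : PySem.Dict (Int × Int) Int) (st : PySem.Dict (Int × Int) Int × Bool)
    (dir : Int × Int) (hdir : dir ∈ dirsA)
    (hdd : dd ≤ maxWt m * (cntB m st.1 : Int)) (hG : GoodB m si sj dist0 st) :
    GoodB m si sj dist0 (stepDirB m (m.length : Int) ((m.headD []).length : Int) r0 c0 dd st dir) ∧
    dd ≤ maxWt m *
      (cntB m (stepDirB m (m.length : Int) ((m.headD []).length : Int) r0 c0 dd st dir).1 : Int) := by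
  obtain ⟨S, C, N, D, Me, Ff, Ft⟩ := hG
  have hmw := maxWt_nonneg m
  unfold stepDirB
  by_cases h1 : 0 ≤ r0 + dir.1 ∧ r0 + dir.1 < (m.length : Int) ∧ 0 ≤ c0 + dir.2 ∧
      c0 + dir.2 < ((m.headD []).length : Int)
  case neg => rw [if_neg h1]; exact ⟨⟨S, C, N, D, Me, Ff, Ft⟩, hdd⟩
  rw [if_pos h1]
  have hvC : validC m (r0 + dir.1) (c0 + dir.2) := h1
  by_cases h2 : pyGet2 m (r0 + dir.1) (c0 + dir.2) "" ≠ "A" ∧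
      ¬(pyGet2 m (r0 + dir.1) (c0 + dir.2) "" = "." ∨ pyGet2 m (r0 + dir.1) (c0 + dir.2) "" = "M" ∨
        pyGet2 m (r0 + dir.1) (c0 + dir.2) "" = "U" ∨ pyGet2 m (r0 + dir.1) (c0 + dir.2) "" = "P")
  case neg => rw [if_neg h2]; exact ⟨⟨S, C, N, D, Me, Ff, Ft⟩, hdd⟩
  rw [if_pos h2]
  have hdigC : digitC m (r0 + dir.1) (c0 + dir.2) := ⟨hvC, h2.1, h2.2⟩
  have hw0 : 0 ≤ wtC m (r0 + dir.1) (c0 + dir.2) := (digit_parse hpre hdigC).2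
  have hwmax : wtC m (r0 + dir.1) (c0 + dir.2) ≤ maxWt m := wt_le_maxWt hvC
  have hwt : (PySem.Int.ofStr? (pyGet2 m (r0 + dir.1) (c0 + dir.2) "")).getD 0 =
      wtC m (r0 + dir.1) (c0 + dir.2) := rfl
  have hreach' : ReachP m si sj (r0 + dir.1) (c0 + dir.2)
      (dd + wtC m (r0 + dir.1) (c0 + dir.2)) := ReachP.step dir hreach hdir hdigC
  have hInsGood : ∀ (hcnt : dd + wtC m (r0 + dir.1) (c0 + dir.2) ≤
        maxWt m * (cntB m (PySem.Dict.insert st.1 (r0 + dir.1, c0 + dir.2)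
          (dd + wtC m (r0 + dir.1) (c0 + dir.2))) : Int))
      (hcntmono : cntB m st.1 ≤ cntB m (PySem.Dict.insert st.1 (r0 + dir.1, c0 + dir.2)
          (dd + wtC m (r0 + dir.1) (c0 + dir.2))))
      (hmeas : measB m (PySem.Dict.insert st.1 (r0 + dir.1, c0 + dir.2)
          (dd + wtC m (r0 + dir.1) (c0 + dir.2))) < measB m st.1)
      (hDnew : ∀ v : Int, PySem.Dict.get? dist0 (r0 + dir.1, c0 + dir.2) = some v →
          dd + wtC m (r0 + dir.1) (c0 + dir.2) ≤ v),
      GoodB m si sj dist0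
        (PySem.Dict.insert st.1 (r0 + dir.1, c0 + dir.2)
          (dd + wtC m (r0 + dir.1) (c0 + dir.2)), true) ∧
      dd ≤ maxWt m * (cntB m (PySem.Dict.insert st.1 (r0 + dir.1, c0 + dir.2)
          (dd + wtC m (r0 + dir.1) (c0 + dir.2))) : Int) := by
    intro hcnt hcntmono hmeas hDnew
    have hcnt' : maxWt m * (cntB m st.1 : Int) ≤ maxWt m *
        (cntB m (PySem.Dict.insert st.1 (r0 + dir.1, c0 + dir.2)
          (dd + wtC m (r0 + dir.1) (c0 + dir.2))) : Int) := by
      apply mul_le_mul_of_nonneg_left _ hmw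
      exact_mod_cast hcntmono
    refine ⟨⟨?_, ?_, PySem.Dict.nodup_keys_insert _ _ _ N, ?_, le_trans (le_of_lt hmeas) Me,
      ?_, ?_⟩, le_trans hdd hcnt'⟩
    · intro p v h
      rw [PySem.Dict.get?_insert] at h
      by_cases hp : p = (r0 + dir.1, c0 + dir.2)
      · rw [if_pos hp] at h
        injection h with h
        subst hp
        exact ⟨hdigC, h ▸ hreach', by omega⟩
      · rw [if_neg hp] at h
        exact S p v h
    · intro p v h
      rw [PySem.Dict.get?_insert] at h
      by_cases hp : p = (r0 + dir.1, c0 + dir.2)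
      · rw [if_pos hp] at h
        injection h with h
        exact h ▸ hcnt
      · rw [if_neg hp] at h
        exact le_trans (C p v h) hcnt'
    · intro p v h0
      by_cases hp : p = (r0 + dir.1, c0 + dir.2)
      · refine ⟨dd + wtC m (r0 + dir.1) (c0 + dir.2),
          by rw [PySem.Dict.get?_insert, if_pos hp], ?_⟩
        subst hp
        exact hDnew v h0
      · obtain ⟨v', hv', hle⟩ := D p v h0
        exact ⟨v', by rw [PySem.Dict.get?_insert, if_neg hp]; exact hv', hle⟩
    · intro h
      simp at h
    · intro _
      cases hb : st.2 with
      | false => rw [Ff hb] at hmeas ⊢; exact hmeas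
      | true => exact lt_of_lt_of_le hmeas (le_of_lt (Ft hb))
  cases hold : PySem.Dict.get? st.1 (r0 + dir.1, c0 + dir.2) with
  | none =>
    dsimp only
    rw [hwt]
    have hcnt_eq := cntB_insert_new hvC hold (dd + wtC m (r0 + dir.1) (c0 + dir.2))
    have hc1 : (cntB m (PySem.Dict.insert st.1 (r0 + dir.1, c0 + dir.2)
        (dd + wtC m (r0 + dir.1) (c0 + dir.2))) : Int) = (cntB m st.1 : Int) + 1 := by
      rw [hcnt_eq]; push_cast; ring
    have hring : maxWt m * ((cntB m st.1 : Int) + 1) = maxWt m * (cntB m st.1 : Int) + maxWt m := by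
      ring
    have hcnt : dd + wtC m (r0 + dir.1) (c0 + dir.2) ≤
        maxWt m * (cntB m (PySem.Dict.insert st.1 (r0 + dir.1, c0 + dir.2)
          (dd + wtC m (r0 + dir.1) (c0 + dir.2))) : Int) := by
      rw [hc1, hring]; omega
    have hcells := cntB_lt_cells hvC hold
    have hbig : dd + wtC m (r0 + dir.1) (c0 + dir.2) ≤
        maxWt m * ((m.length * (m.headD []).length : Nat) : Int) := by
      have h2' : maxWt m * ((cntB m st.1 : Int) + 1) ≤
          maxWt m * ((m.length * (m.headD []).length : Nat) : Int) := by
        apply mul_le_mul_of_nonneg_left _ hmw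
        exact_mod_cast hcells
      omega
    have hmeas : measB m (PySem.Dict.insert st.1 (r0 + dir.1, c0 + dir.2)
        (dd + wtC m (r0 + dir.1) (c0 + dir.2))) < measB m st.1 := by
      apply measB_insert_lt hvC
      rw [hold]
      simp only [potB]
      omega
    refine hInsGood hcnt (hcnt_eq ▸ by omega) hmeas ?_
    intro v h0
    obtain ⟨v', hv', -⟩ := D _ v h0
    rw [hold] at hv'
    cases hv'
  | some u =>
    dsimp only
    by_cases hlt : dd + (PySem.Int.ofStr? (pyGet2 m (r0 + dir.1) (c0 + dir.2) "")).getD 0 < u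
    · rw [if_pos hlt, hwt]
      rw [hwt] at hlt
      have hu0 : 0 ≤ u := (S _ u hold).2.2
      have hcnt_eq := cntB_insert_old (m := m) hold (dd + wtC m (r0 + dir.1) (c0 + dir.2))
      have hub := C _ u hold
      have hcnt : dd + wtC m (r0 + dir.1) (c0 + dir.2) ≤
          maxWt m * (cntB m (PySem.Dict.insert st.1 (r0 + dir.1, c0 + dir.2)
            (dd + wtC m (r0 + dir.1) (c0 + dir.2))) : Int) := by
        rw [hcnt_eq]; omega
      have hmeas : measB m (PySem.Dict.insert st.1 (r0 + dir.1, c0 + dir.2)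
          (dd + wtC m (r0 + dir.1) (c0 + dir.2))) < measB m st.1 := by
        apply measB_insert_lt hvC
        rw [hold]
        simp only [potB]
        omega
      refine hInsGood hcnt (hcnt_eq ▸ le_rfl) hmeas ?_
      intro v h0
      obtain ⟨v', hv', hle⟩ := D _ v h0
      rw [hold] at hv'
      injection hv' with hv'
      omega
    · rw [if_neg hlt]
      exact ⟨⟨S, C, N, D, Me, Ff, Ft⟩, hdd⟩

theorem cellBodyB_good {m : List (List String)} {si sj : Int} (hpre : PreM m)
    (dist0 : PySem.Dict (Int × Int) Int) (st : PySem.Dict (Int × Int) Int × Bool)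
    (r0 c0 : Int) (hG : GoodB m si sj dist0 st) :
    GoodB m si sj dist0 (cellBodyB m (m.length : Int) ((m.headD []).length : Int) st r0 c0) := by
  unfold cellBodyB
  cases hold : PySem.Dict.get? st.1 (r0, c0) with
  | none => exact hG
  | some dd =>
    obtain ⟨hdig, hreach, hdd0⟩ := hG.1 _ dd hold
    have hdd : dd ≤ maxWt m * (cntB m st.1 : Int) := hG.2.1 _ dd hold
    have := foldl_pres
      (fun s => GoodB m si sj dist0 s ∧ dd ≤ maxWt m * (cntB m s.1 : Int))
      (stepDirB m (m.length : Int) ((m.headD []).length : Int) r0 c0 dd) dirsA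
      (fun s dir hdirm hP => stepDirB_good hpre hreach hdd0 dist0 s dir hdirm hP.2 hP.1)
      st ⟨hG, hdd⟩
    exact this.1

theorem sweepB_good {m : List (List String)} {si sj : Int} (hpre : PreM m)
    (dist0 : PySem.Dict (Int × Int) Int) (hS : SoundB m si sj dist0) (hC : CBB m dist0)
    (hN : (PySem.Dict.keys dist0).Nodup) :
    GoodB m si sj dist0 (sweepB m dist0) := by
  unfold sweepB
  have hinit : GoodB m si sj dist0 (dist0, false) :=
    ⟨hS, hC, hN, DLe_refl dist0, le_rfl, fun _ => rfl, fun h => by cases h⟩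
  refine foldl_pres (GoodB m si sj dist0) _ _ ?_ _ hinit
  intro s r _ hP
  refine foldl_pres (GoodB m si sj dist0) _ _ ?_ _ hP
  intro s' c _ hP'
  exact cellBodyB_good hpre dist0 s' r c hP'

theorem sweepB_false {m : List (List String)} {si sj : Int} (hpre : PreM m)
    (dist0 : PySem.Dict (Int × Int) Int) (hS : SoundB m si sj dist0)
    (hfalse : (sweepB m dist0).2 = false) :
    (sweepB m dist0).1 = dist0 ∧ FixB m dist0 := by
  have hcellc : ∀ (s : PySem.Dict (Int × Int) Int × Bool) (rc : Int) (cc : Int),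
      cellBodyB m (m.length : Int) ((m.headD []).length : Int) s rc cc = s ∨
      (cellBodyB m (m.length : Int) ((m.headD []).length : Int) s rc cc).2 = true :=
    fun s rc cc => cellBodyB_cases m _ _ s rc cc
  have hrowc : ∀ (s : PySem.Dict (Int × Int) Int × Bool) (r : Int),
      (PySem.List.pyRange 0 ((m.headD []).length : Int) 1).foldl
        (fun st c => cellBodyB m (m.length : Int) ((m.headD []).length : Int) st r c) s = s ∨
      ((PySem.List.pyRange 0 ((m.headD []).length : Int) 1).foldl
        (fun st c => cellBodyB m (m.length : Int) ((m.headD []).length : Int) st r c) s).2 = true :=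
    fun s r => foldl_cases _ _ (fun s' c => hcellc s' r c) s
  have hrowmono : ∀ (s : PySem.Dict (Int × Int) Int × Bool) (r : Int), s.2 = true →
      ((PySem.List.pyRange 0 ((m.headD []).length : Int) 1).foldl
        (fun st c => cellBodyB m (m.length : Int) ((m.headD []).length : Int) st r c) s).2 = true := by
    intro s r hs
    rcases hrowc s r with h | h
    · rw [h]; exact hs
    · exact h
  have hrowkeep : ∀ (s : PySem.Dict (Int × Int) Int × Bool) (r : Int),
      ((PySem.List.pyRange 0 ((m.headD []).length : Int) 1).foldl
        (fun st c => cellBodyB m (m.length : Int) ((m.headD []).length : Int) st r c) s).2 = false →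
      (PySem.List.pyRange 0 ((m.headD []).length : Int) 1).foldl
        (fun st c => cellBodyB m (m.length : Int) ((m.headD []).length : Int) st r c) s = s := by
    intro s r hf
    rcases hrowc s r with h | h
    · exact h
    · rw [h] at hf; cases hf
  unfold sweepB at hfalse ⊢
  obtain ⟨hid, hsteps⟩ := foldl_flag_false _ (fun s r => hrowmono s r) _
    (fun s r _ hf => hrowkeep s r hf) (dist0, false) hfalse
  refine ⟨by rw [hid], ?_⟩
  -- extract the per-cell no-improvement facts
  intro p v hv dir hdirm hdig
  have hvalp : validC m p.1 p.2 := (hS p v hv).1.1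
  have hrmem : p.1 ∈ PySem.List.pyRange 0 (m.length : Int) 1 := by
    rw [PySem.List.mem_pyRange_one]
    exact ⟨hvalp.1, by simpa [rowsI] using hvalp.2.1⟩
  have hcmem : p.2 ∈ PySem.List.pyRange 0 ((m.headD []).length : Int) 1 := by
    rw [PySem.List.mem_pyRange_one]
    exact ⟨hvalp.2.2.1, by simpa [colsI] using hvalp.2.2.2⟩
  have hrow := hsteps p.1 hrmem
  obtain ⟨-, hcells⟩ := foldl_flag_false
    (f := fun st c => cellBodyB m (m.length : Int) ((m.headD []).length : Int) st p.1 c)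
    (fun s c hs => by
      dsimp only
      rcases hcellc s p.1 c with h | h
      · rw [h]; exact hs
      · exact h) _
    (fun s c _ hf => by
      dsimp only at hf ⊢
      rcases hcellc s p.1 c with h | h
      · exact h
      · rw [h] at hf; cases hf) (dist0, false)
    (by rw [hrow])
  have hcell := hcells p.2 hcmem
  unfold cellBodyB at hcell
  rw [show ((dist0, false) : PySem.Dict (Int × Int) Int × Bool).1 = dist0 from rfl] at hcell
  rw [show (p.1, p.2) = p from rfl, hv] at hcell
  dsimp only at hcell
  obtain ⟨-, hdirsteps⟩ := foldl_flag_false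
    (f := stepDirB m (m.length : Int) ((m.headD []).length : Int) p.1 p.2 v)
    (fun s dir' hs => by
      rcases stepDirB_cases m (m.length : Int) ((m.headD []).length : Int) p.1 p.2 v s dir' with h | h
      · rw [h]; exact hs
      · exact h) _
    (fun s dir' _ hf => by
      rcases stepDirB_cases m (m.length : Int) ((m.headD []).length : Int) p.1 p.2 v s dir' with h | h
      · exact h
      · rw [h] at hf; cases hf) (dist0, false)
    (by rw [hcell])
  have hstep := hdirsteps dir hdirm
  unfold stepDirB at hstep
  have hvC : (0 ≤ p.1 + dir.1 ∧ p.1 + dir.1 < (m.length : Int) ∧ 0 ≤ p.2 + dir.2 ∧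
      p.2 + dir.2 < ((m.headD []).length : Int)) := hdig.1
  rw [if_pos hvC] at hstep
  have hdig' : (pyGet2 m (p.1 + dir.1) (p.2 + dir.2) "" ≠ "A" ∧
      ¬(pyGet2 m (p.1 + dir.1) (p.2 + dir.2) "" = "." ∨ pyGet2 m (p.1 + dir.1) (p.2 + dir.2) "" = "M" ∨
        pyGet2 m (p.1 + dir.1) (p.2 + dir.2) "" = "U" ∨ pyGet2 m (p.1 + dir.1) (p.2 + dir.2) "" = "P")) :=
    ⟨hdig.2.1, hdig.2.2⟩
  rw [if_pos hdig'] at hstep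
  cases hold : PySem.Dict.get? dist0 (p.1 + dir.1, p.2 + dir.2) with
  | none =>
    rw [show ((dist0, false) : PySem.Dict (Int × Int) Int × Bool).1 = dist0 from rfl, hold] at hstep
    have := congrArg Prod.snd hstep
    cases this
  | some u =>
    rw [show ((dist0, false) : PySem.Dict (Int × Int) Int × Bool).1 = dist0 from rfl, hold] at hstep
    dsimp only at hstep
    by_cases hlt : v + (PySem.Int.ofStr? (pyGet2 m (p.1 + dir.1) (p.2 + dir.2) "")).getD 0 < u
    · rw [if_pos hlt] at hstep
      have := congrArg Prod.snd hstep
      cases this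
    · refine ⟨u, rfl, ?_⟩
      have hwt : (PySem.Int.ofStr? (pyGet2 m (p.1 + dir.1) (p.2 + dir.2) "")).getD 0 =
          wtC m (p.1 + dir.1) (p.2 + dir.2) := rfl
      rw [hwt] at hlt
      omega

theorem loopB_post {m : List (List String)} {si sj : Int} (hpre : PreM m) :
    ∀ (fuel : Nat) (dist : PySem.Dict (Int × Int) Int),
      SoundB m si sj dist → CBB m dist → (PySem.Dict.keys dist).Nodup → measB m dist < fuel →
      SoundB m si sj (loopB m fuel dist) ∧ (PySem.Dict.keys (loopB m fuel dist)).Nodup ∧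
        DLe (loopB m fuel dist) dist ∧ FixB m (loopB m fuel dist) := by
  intro fuel
  induction fuel with
  | zero => intro dist _ _ _ h; omega
  | succ f ih =>
    intro dist hS hC hN hfu
    have hG := sweepB_good hpre dist hS hC hN
    cases hsw : sweepB m dist with
    | mk dist' ch =>
      have hred : loopB m (f + 1) dist = if ch then loopB m f dist' else dist' := by
        rw [loopB, hsw]
      cases ch with
      | false =>
        obtain ⟨heq, hfix⟩ := sweepB_false hpre dist hS (by rw [hsw])
        have heq' : dist' = dist := by rw [hsw] at heq; exact heq
        rw [hred, if_neg (by simp), heq']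
        exact ⟨hS, hN, DLe_refl dist, hfix⟩
      | true =>
        rw [hsw] at hG
        obtain ⟨S', C', N', D', -, -, Ft'⟩ := hG
        have hm : measB m dist' < measB m dist := Ft' rfl
        obtain ⟨r1, r2, r3, r4⟩ := ih dist' S' C' N' (by omega)
        rw [hred, if_pos rfl]
        exact ⟨r1, r2, DLe_trans r3 D', r4⟩

-- ---------- B-side: seeding ----------

def SeedClause (m : List (List String)) (si sj : Int) (st : Int × PySem.Dict (Int × Int) Int)
    (dir : Int × Int) : Prop :=
  validC m (si + dir.1) (sj + dir.2) →
    (cellV m (si + dir.1) (sj + dir.2) = "A" → st.1 ≤ 0) ∧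
    (digitC m (si + dir.1) (sj + dir.2) →
      ∃ u, PySem.Dict.get? st.2 (si + dir.1, sj + dir.2) = some u ∧
        u ≤ wtC m (si + dir.1) (sj + dir.2))

theorem seed_facts {m : List (List String)} {si sj th : Int} (hpre : PreM m) :
    ∀ (dl : List (Int × Int)), (∀ d ∈ dl, d ∈ dirsA) →
    ∀ (st : Int × PySem.Dict (Int × Int) Int),
      st.1 ≤ th → SGood m si sj th st.1 → SoundB m si sj st.2 → CBB m st.2 →
      (PySem.Dict.keys st.2).Nodup →
      (dl.foldl (seedStepB m (m.length : Int) ((m.headD []).length : Int) si sj) st).1 ≤ st.1 ∧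
      (dl.foldl (seedStepB m (m.length : Int) ((m.headD []).length : Int) si sj) st).1 ≤ th ∧
      SGood m si sj th
        (dl.foldl (seedStepB m (m.length : Int) ((m.headD []).length : Int) si sj) st).1 ∧
      SoundB m si sj
        (dl.foldl (seedStepB m (m.length : Int) ((m.headD []).length : Int) si sj) st).2 ∧
      CBB m (dl.foldl (seedStepB m (m.length : Int) ((m.headD []).length : Int) si sj) st).2 ∧
      (PySem.Dict.keys
        (dl.foldl (seedStepB m (m.length : Int) ((m.headD []).length : Int) si sj) st).2).Nodup ∧
      (∀ p v, PySem.Dict.get? st.2 p = some v →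
        ∃ v', PySem.Dict.get?
          (dl.foldl (seedStepB m (m.length : Int) ((m.headD []).length : Int) si sj) st).2 p
            = some v' ∧ v' ≤ v) ∧
      (∀ dir ∈ dl, SeedClause m si sj
        (dl.foldl (seedStepB m (m.length : Int) ((m.headD []).length : Int) si sj) st) dir) := by
  intro dl
  induction dl with
  | nil =>
    intro _ st h1 h2 h3 h4 h5
    exact ⟨le_rfl, h1, h2, h3, h4, h5, fun p v hv => ⟨v, hv, le_rfl⟩,
      fun dir hdir => absurd hdir (List.not_mem_nil)⟩
  | cons d dl ih =>
    intro hdl st h1 h2 h3 h4 h5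
    have hd : d ∈ dirsA := hdl d List.mem_cons_self
    have hmw := maxWt_nonneg m
    -- one seeding step
    have hstep : (seedStepB m (m.length : Int) ((m.headD []).length : Int) si sj st d).1 ≤ st.1 ∧
        (seedStepB m (m.length : Int) ((m.headD []).length : Int) si sj st d).1 ≤ th ∧
        SGood m si sj th (seedStepB m (m.length : Int) ((m.headD []).length : Int) si sj st d).1 ∧
        SoundB m si sj (seedStepB m (m.length : Int) ((m.headD []).length : Int) si sj st d).2 ∧
        CBB m (seedStepB m (m.length : Int) ((m.headD []).length : Int) si sj st d).2 ∧
        (PySem.Dict.keys (seedStepB m (m.length : Int) ((m.headD []).length : Int) si sj st d).2).Nodup ∧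
        (∀ p v, PySem.Dict.get? st.2 p = some v →
          ∃ v', PySem.Dict.get?
            (seedStepB m (m.length : Int) ((m.headD []).length : Int) si sj st d).2 p
              = some v' ∧ v' ≤ v) ∧
        SeedClause m si sj (seedStepB m (m.length : Int) ((m.headD []).length : Int) si sj st d) d := by
      unfold seedStepB
      by_cases hv1 : 0 ≤ si + d.1 ∧ si + d.1 < (m.length : Int) ∧ 0 ≤ sj + d.2 ∧
          sj + d.2 < ((m.headD []).length : Int)
      case neg =>
        rw [if_neg hv1]
        exact ⟨le_rfl, h1, h2, h3, h4, h5, fun p v hv => ⟨v, hv, le_rfl⟩,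
          fun hval => absurd hval hv1⟩
      rw [if_pos hv1]
      have hvC : validC m (si + d.1) (sj + d.2) := hv1
      by_cases hA : pyGet2 m (si + d.1) (sj + d.2) "" = "A"
      · rw [if_pos hA]
        have hsg : SGood m si sj th (min st.1 0) := by
          rcases min_cases st.1 0 with ⟨heq, -⟩ | ⟨heq, -⟩
          · rw [heq]; exact h2
          · rw [heq]; exact Or.inr ⟨si, sj, ReachP.base, ⟨d, hd, hvC, hA⟩⟩
        refine ⟨min_le_left _ _, le_trans (min_le_left _ _) h1, hsg, h3, h4, h5,
          fun p v hv => ⟨v, hv, le_rfl⟩, fun _ => ⟨fun _ => min_le_right _ _, fun hdig => ?_⟩⟩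
        exact absurd hA hdig.2.1
      · rw [if_neg hA]
        by_cases hB : ¬(pyGet2 m (si + d.1) (sj + d.2) "" = "." ∨
            pyGet2 m (si + d.1) (sj + d.2) "" = "M" ∨ pyGet2 m (si + d.1) (sj + d.2) "" = "U" ∨
            pyGet2 m (si + d.1) (sj + d.2) "" = "P")
        case neg =>
          rw [if_neg hB]
          refine ⟨le_rfl, h1, h2, h3, h4, h5, fun p v hv => ⟨v, hv, le_rfl⟩,
            fun _ => ⟨fun hcell => absurd hcell hA, fun hdig => ?_⟩⟩
          exact absurd (not_not.mp hB) hdig.2.2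
        rw [if_pos hB]
        have hdigC : digitC m (si + d.1) (sj + d.2) := ⟨hvC, hA, hB⟩
        have hw0 : 0 ≤ wtC m (si + d.1) (sj + d.2) := (digit_parse hpre hdigC).2
        have hwmax : wtC m (si + d.1) (sj + d.2) ≤ maxWt m := wt_le_maxWt hvC
        have hwt : (PySem.Int.ofStr? (pyGet2 m (si + d.1) (sj + d.2) "")).getD 0 =
            wtC m (si + d.1) (sj + d.2) := rfl
        have hreach' : ReachP m si sj (si + d.1) (sj + d.2) (wtC m (si + d.1) (sj + d.2)) := by
          have := ReachP.step (m := m) (si := si) (sj := sj) d ReachP.base hd hdigC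
          simpa using this
        have hInsOk : ∀ w' : Int, w' = wtC m (si + d.1) (sj + d.2) →
            (∀ u, PySem.Dict.get? st.2 (si + d.1, sj + d.2) = some u → w' < u) →
            SoundB m si sj (PySem.Dict.insert st.2 (si + d.1, sj + d.2) w') ∧
            CBB m (PySem.Dict.insert st.2 (si + d.1, sj + d.2) w') ∧
            (PySem.Dict.keys (PySem.Dict.insert st.2 (si + d.1, sj + d.2) w')).Nodup ∧
            (∀ p v, PySem.Dict.get? st.2 p = some v →
              ∃ v', PySem.Dict.get? (PySem.Dict.insert st.2 (si + d.1, sj + d.2) w') p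
                = some v' ∧ v' ≤ v) := by
          intro w' hw' hless
          have hcntpos : 1 ≤ cntB m (PySem.Dict.insert st.2 (si + d.1, sj + d.2) w') := by
            by_contra hcp
            have h0 : cntB m (PySem.Dict.insert st.2 (si + d.1, sj + d.2) w') = 0 := by omega
            have h00 := List.countP_eq_zero.mp h0 (si + d.1, sj + d.2) (mem_cellList.mpr hvC)
            rw [PySem.Dict.get?_insert, if_pos rfl] at h00
            simp at h00
          have hcmono : (cntB m st.2 : Int) ≤
              (cntB m (PySem.Dict.insert st.2 (si + d.1, sj + d.2) w') : Int) := by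
            exact_mod_cast cntB_mono (m := m) _ w'
          refine ⟨?_, ?_, PySem.Dict.nodup_keys_insert _ _ _ h5, ?_⟩
          · intro p v hv
            rw [PySem.Dict.get?_insert] at hv
            by_cases hp : p = (si + d.1, sj + d.2)
            · rw [if_pos hp] at hv
              injection hv with hv
              subst hp
              exact ⟨hdigC, hv ▸ (hw' ▸ hreach'), by omega⟩
            · rw [if_neg hp] at hv
              exact h3 p v hv
          · intro p v hv
            rw [PySem.Dict.get?_insert] at hv
            by_cases hp : p = (si + d.1, sj + d.2)
            · rw [if_pos hp] at hv
              injection hv with hv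
              have : maxWt m * (1 : Int) ≤ maxWt m *
                  (cntB m (PySem.Dict.insert st.2 (si + d.1, sj + d.2) w') : Int) := by
                apply mul_le_mul_of_nonneg_left _ hmw
                exact_mod_cast hcntpos
              omega
            · rw [if_neg hp] at hv
              have := h4 p v hv
              have h2' : maxWt m * (cntB m st.2 : Int) ≤ maxWt m *
                  (cntB m (PySem.Dict.insert st.2 (si + d.1, sj + d.2) w') : Int) :=
                mul_le_mul_of_nonneg_left hcmono hmw
              omega
          · intro p v hv
            by_cases hp : p = (si + d.1, sj + d.2)
            · refine ⟨w', by rw [PySem.Dict.get?_insert, if_pos hp], ?_⟩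
              subst hp
              exact le_of_lt (hless v hv)
            · exact ⟨v, by rw [PySem.Dict.get?_insert, if_neg hp]; exact hv, le_rfl⟩
        cases hold : PySem.Dict.get? st.2 (si + d.1, sj + d.2) with
        | none =>
          dsimp only
          rw [hwt]
          obtain ⟨o1, o2, o3, o4⟩ := hInsOk _ rfl (by intro u hu; rw [hold] at hu; cases hu)
          refine ⟨le_rfl, h1, h2, o1, o2, o3, o4, fun _ => ⟨fun hcell => absurd hcell hA,
            fun _ => ⟨wtC m (si + d.1) (sj + d.2), by rw [PySem.Dict.get?_insert, if_pos rfl], le_rfl⟩⟩⟩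
        | some u =>
          dsimp only
          by_cases hlt : (PySem.Int.ofStr? (pyGet2 m (si + d.1) (sj + d.2) "")).getD 0 < u
          · rw [if_pos hlt, hwt]
            rw [hwt] at hlt
            obtain ⟨o1, o2, o3, o4⟩ := hInsOk _ rfl (by
              intro u' hu'
              rw [hold] at hu'
              injection hu' with hu'
              omega)
            refine ⟨le_rfl, h1, h2, o1, o2, o3, o4, fun _ => ⟨fun hcell => absurd hcell hA,
              fun _ => ⟨wtC m (si + d.1) (sj + d.2), by rw [PySem.Dict.get?_insert, if_pos rfl], le_rfl⟩⟩⟩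
          · rw [if_neg hlt]
            rw [hwt] at hlt
            exact ⟨le_rfl, h1, h2, h3, h4, h5, fun p v hv => ⟨v, hv, le_rfl⟩,
              fun _ => ⟨fun hcell => absurd hcell hA, fun _ => ⟨u, hold, by omega⟩⟩⟩
    obtain ⟨s1, s2, s3, s4, s5, s6, s7, s8⟩ := hstep
    obtain ⟨f1, f2, f3, f4, f5, f6, f7, f8⟩ :=
      ih (fun d' hd' => hdl d' (List.mem_cons_of_mem _ hd'))
        (seedStepB m (m.length : Int) ((m.headD []).length : Int) si sj st d) s2 s3 s4 s5 s6
    rw [List.foldl_cons]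
    refine ⟨le_trans f1 s1, f2, f3, f4, f5, f6, ?_, ?_⟩
    · intro p v hv
      obtain ⟨v1, hv1, hle1⟩ := s7 p v hv
      obtain ⟨v2, hv2, hle2⟩ := f7 p v1 hv1
      exact ⟨v2, hv2, le_trans hle2 hle1⟩
    · intro dir hdirm
      rcases List.mem_cons.mp hdirm with rfl | hdirm
      · intro hval
        obtain ⟨cA, cD⟩ := s8 hval
        refine ⟨fun hc => le_trans f1 (cA hc), fun hdig => ?_⟩
        obtain ⟨u, hu, hule⟩ := cD hdig
        obtain ⟨u', hu', hule'⟩ := f7 _ u hu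
        exact ⟨u', hu', le_trans hule' hule⟩
      · exact f8 dir hdirm

-- ---------- B-side: final collection ----------

theorem foldl_le_start {β : Type} (f : Int → β → Int) (hdec : ∀ s x, f s x ≤ s) (l : List β) :
    ∀ s, l.foldl f s ≤ s := by
  induction l with
  | nil => intro s; exact le_rfl
  | cons x t ih => intro s; exact le_trans (ih (f s x)) (hdec s x)

theorem foldl_le_of_hit {β : Type} (f : Int → β → Int) (hdec : ∀ s x, f s x ≤ s) (l : List β)
    {x0 : β} (hx0 : x0 ∈ l) (target : Int) (hhit : ∀ s, f s x0 ≤ target) :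
    ∀ s, l.foldl f s ≤ target := by
  induction l with
  | nil => cases hx0
  | cons x t ih =>
    intro s
    rw [List.foldl_cons]
    rcases List.mem_cons.mp hx0 with rfl | hx0'
    · exact le_trans (foldl_le_start f hdec t _) (hhit s)
    · exact ih hx0' (f s x)

theorem collectDir_dec (m : List (List String)) (rows cols : Int) (p : (Int × Int) × Int) :
    ∀ (s : Int) (dir : Int × Int), collectDirB m rows cols p s dir ≤ s := by
  intro s dir
  unfold collectDirB
  dsimp only
  split_ifs
  · exact min_le_left _ _
  · exact le_rfl

theorem collectCell_le (m : List (List String)) (rows cols : Int) (best : Int)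
    (p : (Int × Int) × Int) : collectCellB m rows cols best p ≤ best :=
  foldl_le_start _ (collectDir_dec m rows cols p) dirsA best

theorem collectCell_hits {m : List (List String)} {p : (Int × Int) × Int} {dir : Int × Int}
    (hdirm : dir ∈ dirsA)
    (hcond : (0 ≤ p.1.1 + dir.1 ∧ p.1.1 + dir.1 < (m.length : Int) ∧ 0 ≤ p.1.2 + dir.2 ∧
        p.1.2 + dir.2 < ((m.headD []).length : Int)) ∧
      pyGet2 m (p.1.1 + dir.1) (p.1.2 + dir.2) "" = "A") :
    ∀ best, collectCellB m (m.length : Int) ((m.headD []).length : Int) best p ≤ p.2 := by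
  apply foldl_le_of_hit _ (collectDir_dec m _ _ p) dirsA hdirm
  intro s
  unfold collectDirB
  rw [if_pos hcond]
  exact min_le_right _ _

theorem collectCell_sgood {m : List (List String)} {si sj th : Int} {best : Int}
    {p : (Int × Int) × Int} (hre : ReachP m si sj p.1.1 p.1.2 p.2)
    (h : SGood m si sj th best) :
    SGood m si sj th (collectCellB m (m.length : Int) ((m.headD []).length : Int) best p) := by
  unfold collectCellB
  refine foldl_pres (SGood m si sj th) _ _ ?_ _ h
  intro s dir hdirm hP
  unfold collectDirB
  dsimp only
  split_ifs with hcond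
  · rcases min_cases s p.2 with ⟨heq, -⟩ | ⟨heq, -⟩
    · rw [heq]; exact hP
    · rw [heq]
      exact Or.inr ⟨p.1.1, p.1.2, hre, ⟨dir, hdirm, hcond.1, hcond.2⟩⟩
  · exact hP

theorem reachB {m : List (List String)} {si sj : Int} {F : PySem.Dict (Int × Int) Int}
    (hFix : FixB m F) (hSeed : SeededB m si sj F) :
    ∀ x y c : Int, ReachP m si sj x y c →
      (x = si ∧ y = sj ∧ c = 0) ∨ ∃ u, PySem.Dict.get? F (x, y) = some u ∧ u ≤ c := by
  intro x y c hre
  induction hre with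
  | base => exact Or.inl ⟨rfl, rfl, rfl⟩
  | step d hr hd hdig ih =>
    rename_i x' y' c'
    rcases ih with ⟨hx, hy, hc⟩ | ⟨u, hu, hule⟩
    · subst hx; subst hy
      obtain ⟨u, hu, hule⟩ := hSeed d hd hdig
      exact Or.inr ⟨u, hu, by omega⟩
    · obtain ⟨u', hu', hule'⟩ := hFix (x', y') u hu d hd hdig
      have hu2 : PySem.Dict.get? F (x' + d.1, y' + d.2) = some u' := hu'
      have hle2 : u' ≤ u + wtC m (x' + d.1) (y' + d.2) := hule'
      exact Or.inr ⟨u', hu2, by omega⟩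

theorem B_isBest (m : List (List String)) (si sj th : Int)
    (hpm : PreM m) :
    IsBest m si sj th (find_min_wall_length_alt m si sj th) := by
  have hmw := maxWt_nonneg m
  obtain ⟨g1, g2, g3, g4, g5, g6, g7, g8⟩ := seed_facts (th := th) hpm dirsA (fun _ h => h)
    (th, PySem.Dict.empty) le_rfl (Or.inl rfl)
    (by intro p v hv; rw [PySem.Dict.get?_empty] at hv; cases hv)
    (by intro p v hv; rw [PySem.Dict.get?_empty] at hv; cases hv)
    (PySem.Dict.nodup_keys_empty)
  set sd := dirsA.foldl (seedStepB m (m.length : Int) ((m.headD []).length : Int) si sj)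
    (th, PySem.Dict.empty) with hsd
  set L : Nat := m.length * (m.headD []).length with hL
  have hmeas : measB m sd.2 ≤ L * ((maxWt m * (L : Int)).toNat + 1) := by
    have hb : ∀ x ∈ (cellList m).map (fun p => potB m (PySem.Dict.get? sd.2 p)),
        x ≤ (maxWt m * (L : Int)).toNat + 1 := by
      intro x hx
      obtain ⟨p, hp, rfl⟩ := List.mem_map.mp hx
      cases hg : PySem.Dict.get? sd.2 p with
      | none => simp only [potB]; rw [← hL]
      | some v =>
        have hv := g5 p v hg
        have hcnt := cntB_le_cells m sd.2
        have h2' : maxWt m * (cntB m sd.2 : Int) ≤ maxWt m * (L : Int) := by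
          apply mul_le_mul_of_nonneg_left _ hmw
          exact_mod_cast hcnt
        simp only [potB]
        omega
    have := List.sum_le_card_nsmul _ _ hb
    rw [List.length_map, length_cellList, smul_eq_mul, ← hL] at this
    exact this
  have hfuel : measB m sd.2 <
      m.length * (m.headD []).length *
        ((maxWt m * (m.length * (m.headD []).length + 1)).toNat + 2) + 2 := by
    have hmono : (maxWt m * (L : Int)).toNat ≤ (maxWt m * ((L : Int) + 1)).toNat := by
      have : maxWt m * (L : Int) ≤ maxWt m * ((L : Int) + 1) := by
        apply mul_le_mul_of_nonneg_left _ hmw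
        omega
      omega
    have hmul : L * ((maxWt m * (L : Int)).toNat + 1) ≤
        L * ((maxWt m * ((L : Int) + 1)).toNat + 2) :=
      Nat.mul_le_mul_left L (by omega)
    have hLL : (m.length * (m.headD []).length + 1 : Int) = (L : Int) + 1 := by
      rw [hL]; push_cast; ring
    rw [show m.length * (m.headD []).length = L from rfl, hLL]
    omega
  obtain ⟨S', N', D', Fx'⟩ := loopB_post hpm _ sd.2 g4 g5 g6 hfuel
  set F := loopB m
      (m.length * (m.headD []).length *
        ((maxWt m * (m.length * (m.headD []).length + 1)).toNat + 2) + 2) sd.2 with hF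
  have hSeedF : SeededB m si sj F := by
    intro dir hdirm hdig
    obtain ⟨u, hu, hule⟩ := (g8 dir hdirm hdig.1).2 hdig
    obtain ⟨u', hu', hle'⟩ := D' _ u hu
    exact ⟨u', hu', le_trans hle' hule⟩
  have hgoal : find_min_wall_length_alt m si sj th =
      (PySem.Dict.items F).foldl (collectCellB m (m.length : Int) ((m.headD []).length : Int))
        sd.1 := rfl
  rw [hgoal]
  have hdecC : ∀ (s : Int) (pv : (Int × Int) × Int),
      collectCellB m (m.length : Int) ((m.headD []).length : Int) s pv ≤ s :=
    fun s pv => collectCell_le m _ _ s pv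
  constructor
  · -- SGood of the collected best
    refine foldl_pres (SGood m si sj th) _ _ ?_ _ g3
    intro s pv hmem hP
    obtain ⟨p, v⟩ := pv
    have hget : PySem.Dict.get? F p = some v := PySem.Dict.get?_of_mem_items _ hmem N'
    exact collectCell_sgood (S' p v hget).2.1 hP
  · intro c hc
    have hle0 : (PySem.Dict.items F).foldl
        (collectCellB m (m.length : Int) ((m.headD []).length : Int)) sd.1 ≤ sd.1 :=
      foldl_le_start _ hdecC _ _
    rcases hc with rfl | ⟨x, y, hre, ⟨d', hd', hvalg, hcellg⟩⟩
    · exact le_trans hle0 g2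
    · rcases reachB Fx' hSeedF x y c hre with ⟨hx, hy, hc0⟩ | ⟨u, hu, hule⟩
      · subst hx; subst hy; subst hc0
        exact le_trans hle0 ((g8 d' hd' hvalg).1 hcellg)
      · have hitem : ((x, y), u) ∈ PySem.Dict.items F :=
          PySem.Dict.mem_items_of_get?_eq_some _ hu
        have hhit := collectCell_hits (m := m) (p := ((x, y), u)) hd' ⟨hvalg, hcellg⟩
        exact le_trans (foldl_le_of_hit _ hdecC _ hitem u hhit _) hule


-- ---------- the far-start case: no neighbour of the start is on the grid ----------

theorem procDir_invalid {m : List (List String)} {x y c : Int} (st : StA) (d : Int × Int)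
    (h : ¬ validC m (x + d.1) (y + d.2)) : procDirA m x y c st d = st := by
  unfold procDirA
  rw [if_neg]
  intro hcond
  rw [Bool.and_eq_true] at hcond
  exact h ((is_valid_cell_iff m _ _).mp hcond.1)

theorem seedStep_invalid {m : List (List String)} {si sj : Int}
    (st : Int × PySem.Dict (Int × Int) Int) (d : Int × Int)
    (h : ¬ validC m (si + d.1) (sj + d.2)) :
    seedStepB m (m.length : Int) ((m.headD []).length : Int) si sj st d = st := by
  unfold seedStepB
  rw [if_neg]
  exact fun hc => h hc

theorem sweep_empty (m : List (List String)) :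
    sweepB m PySem.Dict.empty = (PySem.Dict.empty, false) := by
  unfold sweepB
  refine foldl_pres (fun s => s = (PySem.Dict.empty, false)) _ _ ?_ _ rfl
  intro s r _ hs
  refine foldl_pres (fun s => s = (PySem.Dict.empty, false)) _ _ ?_ _ hs
  intro s' c _ hs'
  subst hs'
  unfold cellBodyB
  rw [show PySem.Dict.get? ((PySem.Dict.empty : PySem.Dict (Int × Int) Int), false).1 (r, c)
      = none from PySem.Dict.get?_empty _]

theorem farFour {m : List (List String)} {si sj : Int}
    (h1 : ¬ pvInb m si (sj + 1)) (h2 : ¬ pvInb m (si + 1) sj)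
    (h3 : ¬ pvInb m (si - 1) sj) (h4 : ¬ pvInb m si (sj - 1)) :
    (¬ validC m (si + (0:Int)) (sj + 1)) ∧ (¬ validC m (si + 1) (sj + (0:Int))) ∧
    (¬ validC m (si + (-1:Int)) (sj + (0:Int))) ∧ (¬ validC m (si + (0:Int)) (sj + (-1:Int))) := by
  unfold pvInb at h1 h2 h3 h4
  unfold validC rowsI colsI
  refine ⟨fun hv => h1 (by omega), fun hv => h2 (by omega),
    fun hv => h3 (by omega), fun hv => h4 (by omega)⟩

theorem far_A {m : List (List String)} (si sj th : Int)
    (h1 : ¬ pvInb m si (sj + 1)) (h2 : ¬ pvInb m (si + 1) sj)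
    (h3 : ¬ pvInb m (si - 1) sj) (h4 : ¬ pvInb m si (sj - 1)) :
    find_min_wall_length m si sj th = th := by
  obtain ⟨g1, g2, g3, g4⟩ := farFour h1 h2 h3 h4
  show loopA m (2 + 5 * m.length * (m.headD []).length * ((max th 0) + maxWt m + 2).toNat)
    ⟨[(si, sj, 0)], th,
      List.replicate m.length (List.replicate (m.headD []).length false),
      List.replicate m.length (List.replicate (m.headD []).length (none : Option Int))⟩ = th
  rw [show 2 + 5 * m.length * (m.headD []).length * ((max th 0) + maxWt m + 2).toNat =
    (5 * m.length * (m.headD []).length * ((max th 0) + maxWt m + 2).toNat) + 1 + 1 from by omega]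
  rw [loopA]
  dsimp only
  have hfold : ∀ st : StA, dirsA.foldl (procDirA m si sj 0) st = st := by
    intro st
    simp only [dirsA, List.foldl_cons, List.foldl_nil]
    rw [procDir_invalid _ (((0 : Int), (1 : Int))) (by exact g1)]
    rw [procDir_invalid _ (((1 : Int), (0 : Int))) (by exact g2)]
    rw [procDir_invalid _ (((-1 : Int), (0 : Int))) (by exact g3)]
    rw [procDir_invalid _ (((0 : Int), (-1 : Int))) (by exact g4)]
  split_ifs
  · rw [loopA]
  · rw [hfold, loopA]

theorem far_B {m : List (List String)} (si sj th : Int)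
    (h1 : ¬ pvInb m si (sj + 1)) (h2 : ¬ pvInb m (si + 1) sj)
    (h3 : ¬ pvInb m (si - 1) sj) (h4 : ¬ pvInb m si (sj - 1)) :
    find_min_wall_length_alt m si sj th = th := by
  obtain ⟨g1, g2, g3, g4⟩ := farFour h1 h2 h3 h4
  have hseed : dirsA.foldl (seedStepB m (m.length : Int) ((m.headD []).length : Int) si sj)
      (th, PySem.Dict.empty) = (th, PySem.Dict.empty) := by
    simp only [dirsA, List.foldl_cons, List.foldl_nil]
    rw [seedStep_invalid _ (((0 : Int), (1 : Int))) (by exact g1)]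
    rw [seedStep_invalid _ (((1 : Int), (0 : Int))) (by exact g2)]
    rw [seedStep_invalid _ (((-1 : Int), (0 : Int))) (by exact g3)]
    rw [seedStep_invalid _ (((0 : Int), (-1 : Int))) (by exact g4)]
  have hbody : find_min_wall_length_alt m si sj th =
      (PySem.Dict.items (loopB m
        (m.length * (m.headD []).length *
          ((maxWt m * (m.length * (m.headD []).length + 1)).toNat + 2) + 2)
        ((dirsA.foldl (seedStepB m (m.length : Int) ((m.headD []).length : Int) si sj)
          (th, PySem.Dict.empty)).2))).foldl
        (collectCellB m (m.length : Int) ((m.headD []).length : Int))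
        ((dirsA.foldl (seedStepB m (m.length : Int) ((m.headD []).length : Int) si sj)
          (th, PySem.Dict.empty)).1) := rfl
  rw [hbody, hseed]
  rw [show m.length * (m.headD []).length *
      ((maxWt m * (m.length * (m.headD []).length + 1)).toNat + 2) + 2 =
      (m.length * (m.headD []).length *
        ((maxWt m * (m.length * (m.headD []).length + 1)).toNat + 2) + 1) + 1 from by omega]
  rw [show ((th, PySem.Dict.empty) : Int × PySem.Dict (Int × Int) Int).2
      = PySem.Dict.empty from rfl]
  rw [loopB, sweep_empty]
  rfl

theorem main_equal (matrix : List (List String)) (i j threshold : Int)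
    (hpre : Pre_find_min_wall_length matrix i j threshold) :
    find_min_wall_length matrix i j threshold = find_min_wall_length_alt matrix i j threshold := by
  obtain ⟨hne, hrest⟩ := hpre
  rcases hrest with ⟨h1, h2, h3, h4⟩ | hgood
  · rw [far_A i j threshold h1 h2 h3 h4, far_B i j threshold h1 h2 h3 h4]
  · exact IsBest_unique (A_isBest matrix i j threshold ⟨hne, hgood⟩)
      (B_isBest matrix i j threshold ⟨hne, hgood⟩)
-- ===== VERDICT (by name: the statement is the Claim_ definition above) =====
theorem find_min_wall_length_spec : Claim_equal_find_min_wall_length := by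
  intro matrix i j threshold _hdom hpre
  unfold Spec_find_min_wall_length
  exact main_equal matrix i j threshold hpre
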